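-- pv_equiv track=rewrite | github.com/tchindebebruno/AdventOfCodeAI | sol2.py | min_presses_component
-- ===== SOURCE A (Python) =====
-- import math
-- from heapq import heappush, heappop
-- from typing import List, Tuple, Set, FrozenSet, Optional, Dict
--
-- def greedy_upper_bound(targets: List[int], button_sets: List[FrozenSet[int]]) -> Optional[int]:
--     """Greedy 'safe' : ne presse que des boutons dont tous les compteurs sont >0."""
--     r = targets[:]
--     presses = 0
--     buttons = [set(s) for s in button_sets]
--     while True:
--         total = sum(r)
--         if total == 0:
--             return presses
--         best_i = -1
--         best_cov = -1
--         best_t = 0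
--         for i, s in enumerate(buttons):
--             if not s:
--                 continue
--             if any(r[j] == 0 for j in s):
--                 continue
--             cov = sum(r[j] for j in s)
--             if cov > best_cov:
--                 best_cov = cov
--                 best_i = i
--                 best_t = min(r[j] for j in s)
--         if best_i == -1:
--             return None
--         t = best_t
--         for j in buttons[best_i]:
--             r[j] -= t
--         presses += t
--
-- def min_presses_component(targets: List[int], button_sets: List[FrozenSet[int]]) -> int:
--     """
--     A* exact sur une seule composante.
--     État = demandes restantes (tuple d’int >=0).
--     Action = presser un bouton (tous les indices du set décrémentés de 1),
--     jamais d’overshoot (interdit si une composante du set vaut déjà 0).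
--     """
--     if sum(targets) == 0:
--         return 0
--     unique_buttons = list(set(button_sets))
--     Smax = max(len(s) for s in unique_buttons)
--
--     def heuristic(r: Tuple[int, ...]) -> int:
--         s = sum(r)
--         if s == 0:
--             return 0
--         # Chaque press réduit la somme au plus de Smax => borne inf admissible
--         return (s + Smax - 1) // Smax
--
--     ub = greedy_upper_bound(targets, unique_buttons)
--     if ub is None:
--         ub = math.inf
--
--     start = tuple(targets)
--     pq = []
--     g0 = 0
--     f0 = g0 + heuristic(start)
--     heappush(pq, (f0, g0, start))
--     best: Dict[Tuple[int, ...], int] = {start: 0}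
--     buttons_idx = [tuple(sorted(s)) for s in unique_buttons]
--
--     while pq:
--         f, g, state = heappop(pq)
--         if sum(state) == 0:
--             return g
--         if f > ub:
--             continue
--         for s in buttons_idx:
--             # press 'safe' uniquement
--             if any(state[j] == 0 for j in s):
--                 continue
--             ns = list(state)
--             for j in s:
--                 ns[j] -= 1
--             ns_t = tuple(ns)
--             ng = g + 1
--             if ns_t in best and best[ns_t] <= ng:
--                 continue
--             best[ns_t] = ng
--             nf = ng + heuristic(ns_t)
--             if nf <= ub:
--                 heappush(pq, (nf, ng, ns_t))
--     raise ValueError("Search exhausted without solution; input may be unsolvable.")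
-- ===== SOURCE B (Python) =====
-- def min_presses_component(targets, button_sets):
--     """Layered BFS over 'safe' press states; each layer is the deduplicated set of
--     states reachable in exactly `presses` presses (pressing strictly lowers the sum,
--     so no cross-layer visited set is needed)."""
--     buttons = {tuple(sorted(s)) for s in button_sets} - {()}
--     n = len(targets)
--     frontier = {tuple(targets)}
--     presses = 0
--     while frontier:
--         if any(sum(st) == 0 for st in frontier):
--             return presses
--         frontier = {tuple(st[j] - 1 if j in s else st[j] for j in range(n))
--                     for st in frontier for s in buttons
--                     if all(st[j] != 0 for j in s)}
--         presses += 1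
--     raise ValueError("Search exhausted without solution; input may be unsolvable.")
-- ===== Notes on version B (the rewrite author's own statement) =====
-- stated objective: simpler
-- what changed: Replaced the A* search (priority queue ordered by g+heuristic, best-g dictionary, greedy upper bound with f<=ub pruning) by a short layered breadth-first search: each iteration holds the set of states reachable in exactly k safe presses, so the first layer containing an all-zero-sum state gives the minimum; since every safe press strictly lowers the sum, no visited set, heap, heuristic or pruning is needed.
import Mathlib
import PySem

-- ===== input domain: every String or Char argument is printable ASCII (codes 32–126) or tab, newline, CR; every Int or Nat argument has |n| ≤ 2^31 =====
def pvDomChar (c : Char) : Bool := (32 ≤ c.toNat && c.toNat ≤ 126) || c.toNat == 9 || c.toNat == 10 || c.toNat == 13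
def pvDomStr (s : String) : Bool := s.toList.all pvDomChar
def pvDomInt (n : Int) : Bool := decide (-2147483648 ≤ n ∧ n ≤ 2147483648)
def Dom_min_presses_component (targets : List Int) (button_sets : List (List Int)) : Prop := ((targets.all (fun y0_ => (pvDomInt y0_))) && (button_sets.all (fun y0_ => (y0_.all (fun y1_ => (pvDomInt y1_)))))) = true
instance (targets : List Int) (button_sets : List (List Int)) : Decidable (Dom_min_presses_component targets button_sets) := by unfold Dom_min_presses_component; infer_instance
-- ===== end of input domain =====

-- B replaces the A* priority-queue search by a layered breadth-first search (set of states
-- reachable in exactly k safe presses per layer); equal on Pre_ (nonnegative targets,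
-- in-range button indices, solvable instance). Objective: simpler.

-- shared primitives (Python r[j] read / r[j] = v item assignment, exact for in-range j)
def pvGetI (r : List Int) (j : Int) : Int := (PySem.List.pyGet? r j).getD 0
def pvSetI (r : List Int) (j v : Int) : List Int := PySem.List.pySetD r j v
def pvSortB (s : List Int) : List Int := PySem.List.sorted s (fun x => x) false

-- ===== PORT A =====  (transliteration of min_presses_component: greedy upper bound + A*)
-- ns[j] -= t
def pvDecAt (r : List Int) (j t : Int) : List Int := pvSetI r j (pvGetI r j - t)
-- for j in s: ns[j] -= 1
def pvPress (st : List Int) (s : List Int) : List Int := s.foldl (fun a j => pvDecAt a j 1) st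
-- any(state[j] == 0 for j in s)
def pvBlocked (st : List Int) (s : List Int) : Bool := s.any (fun j => pvGetI st j == 0)
-- heuristic(r) with Smax captured
def pvHeur (Smax : Int) (st : List Int) : Int :=
  let s := st.sum
  if s == 0 then 0 else PySem.Int.floordiv (s + Smax - 1) Smax
-- greedy inner selection loop (best_i/best_cov/best_t; we carry the chosen button itself)
def pvGreedyPick (r : List Int) (buttons : List (List Int)) : Int × Int × Option (List Int) :=
  buttons.foldl (fun acc s =>
    if s.isEmpty then acc
    else if pvBlocked r s then acc
    else
      let cov := (s.map (fun j => pvGetI r j)).sum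
      if acc.1 < cov then (cov, (PySem.List.min? (s.map (fun j => pvGetI r j)) (fun x => x)).getD 0, some s)
      else acc) (-1, 0, none)
-- greedy_upper_bound main loop: each non-returning round lowers sum(r) by ≥ 1, so
-- fuel sum(targets)+2 reproduces the Python 'while True' exactly on the admitted inputs
def pvGreedyLoop (buttons : List (List Int)) : Nat → List Int → Int → Option Int
  | 0, _, _ => none
  | fuel+1, r, presses =>
    if r.sum == 0 then some presses
    else
      match pvGreedyPick r buttons with
      | (_, _, none) => none
      | (_, t, some s) => pvGreedyLoop buttons fuel (s.foldl (fun a j => pvDecAt a j t) r) (presses + t)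
-- Python tuple comparison (f, g, state) used by the heap
def pvLeState : List Int → List Int → Bool
  | [], _ => true
  | _ :: _, [] => false
  | a :: as, b :: bs => if a < b then true else if b < a then false else pvLeState as bs
def pvLeTri (x y : Int × Int × List Int) : Bool :=
  if x.1 < y.1 then true else if y.1 < x.1 then false
  else if x.2.1 < y.2.1 then true else if y.2.1 < x.2.1 then false
  else pvLeState x.2.2 y.2.2
-- heappop: remove the (f, g, state)-minimal entry (the heap's internal layout is irrelevant)
def pvPopMin : List (Int × Int × List Int) → Option ((Int × Int × List Int) × List (Int × Int × List Int))
  | [] => none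
  | x :: xs =>
    match pvPopMin xs with
    | none => some (x, [])
    | some (m, rest) => if pvLeTri x m then some (x, xs) else some (m, x :: rest)
-- f > ub and nf <= ub with ub = math.inf encoded as none
def pvFGtUb (f : Int) (ub : Option Int) : Bool := match ub with | none => false | some u => decide (u < f)
def pvFLeUb (f : Int) (ub : Option Int) : Bool := match ub with | none => true | some u => decide (f ≤ u)
-- body of 'for s in buttons_idx' inside the A* loop
def pvExpand (Smax : Int) (ub : Option Int) (g : Int) (st : List Int)
    (acc : List (Int × Int × List Int) × PySem.Dict (List Int) Int) (s : List Int) :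
    List (Int × Int × List Int) × PySem.Dict (List Int) Int :=
  if pvBlocked st s then acc
  else
    let ns := pvPress st s
    let ng := g + 1
    if (match acc.2.get? ns with | some b => decide (b ≤ ng) | none => false) then acc
    else
      let best' := acc.2.insert ns ng
      let nf := ng + pvHeur Smax ns
      if pvFLeUb nf ub then ((nf, ng, ns) :: acc.1, best') else (acc.1, best')
-- the 'while pq' A* loop; fuel strictly exceeds the possible number of iterations on the
-- admitted inputs (each iteration pops, and pushes strictly improve a bounded potential)
def pvAstar (buttons : List (List Int)) (Smax : Int) (ub : Option Int) :
    Nat → List (Int × Int × List Int) → PySem.Dict (List Int) Int → Int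
  | 0, _, _ => -1
  | fuel+1, pq, best =>
    match pvPopMin pq with
    | none => -1
    | some ((f, g, st), rest) =>
      if st.sum == 0 then g
      else if pvFGtUb f ub then pvAstar buttons Smax ub fuel rest best
      else
        let pb := buttons.foldl (pvExpand Smax ub g st) (rest, best)
        pvAstar buttons Smax ub fuel pb.1 pb.2
def min_presses_component (targets : List Int) (button_sets : List (List Int)) : Int :=
  if targets.sum == 0 then 0
  else
    let ubtns := PySem.Set.ofList (button_sets.map pvSortB)
    let Smax : Int := (PySem.List.max? (ubtns.map (fun s => (s.length : Int))) (fun x => x)).getD 0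
    let ub := pvGreedyLoop ubtns (targets.sum.toNat + 2) targets 0
    let fuel := (2 * targets.sum.toNat + 8) * ((targets.map (fun t => t.toNat + 1)).prod + 2)
    pvAstar ubtns Smax ub fuel [(pvHeur Smax targets, 0, targets)]
      ((PySem.Dict.empty).insert targets 0)

-- ===== PORT B =====  (transliteration of Source B: layered BFS over deduplicated state sets)
-- all(st[j] != 0 for j in s)
def pvSafeB (st : List Int) (s : List Int) : Bool := s.all (fun j => !(pvGetI st j == 0))
-- tuple(st[j] - 1 if j in s else st[j] for j in range(n))
def pvPressB (n : Nat) (st : List Int) (s : List Int) : List Int :=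
  (List.range n).map (fun k : Nat => if (k : Int) ∈ s then pvGetI st k - 1 else pvGetI st k)
-- one layer: the set of successors of all frontier states
def pvBfsStep (n : Nat) (buttons : List (List Int)) (frontier : List (List Int)) : List (List Int) :=
  frontier.foldl (fun acc st =>
    buttons.foldl (fun acc s =>
      if pvSafeB st s then PySem.Set.add acc (pvPressB n st s) else acc) acc)
    PySem.Set.empty
-- 'while frontier'; every layer-k state has sum ≤ sum(targets) - k and ≥ 0 on the admitted
-- inputs, so fuel sum(targets)+2 reproduces the Python loop exactly there
def pvBfsLoop (n : Nat) (buttons : List (List Int)) : Nat → List (List Int) → Int → Int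
  | 0, _, _ => -1
  | fuel+1, frontier, presses =>
    if frontier.isEmpty then -1
    else if frontier.any (fun st => st.sum == 0) then presses
    else pvBfsLoop n buttons fuel (pvBfsStep n buttons frontier) (presses + 1)
def min_presses_component_alt (targets : List Int) (button_sets : List (List Int)) : Int :=
  let buttons := PySem.Set.diff (PySem.Set.ofList (button_sets.map pvSortB)) [[]]
  pvBfsLoop targets.length buttons (targets.sum.toNat + 2) [targets] 0

-- ===== PRECONDITION & SPEC =====
def pvMaxT (targets : List Int) : Nat := (targets.map Int.toNat).foldl max 0
-- an exact press-count assignment: button k pressed (c k) times zeroes every counter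
abbrev pvSolvable (targets : List Int) (button_sets : List (List Int)) : Prop :=
  ∃ c : Fin button_sets.length → Fin (pvMaxT targets + 1),
    ∀ i : Fin targets.length,
      (∑ k : Fin button_sets.length,
        if ((i : Nat) : Int) ∈ button_sets.get k then ((c k : Nat) : Int) else 0) = targets.get i
-- Pre_ admits the sum-zero fast path unconditionally; otherwise it excludes inputs where A
-- raises (unsolvable instances: ValueError/ZeroDivisionError; out-of-range button indices:
-- IndexError) or where A's behaviour is accidental (negative targets, where A may diverge or
-- hit sum==0 through cancellation; negative button indices, which silently wrap around).
-- Inner lists must be duplicate-free, as images of frozensets.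
def Pre_min_presses_component (targets : List Int) (button_sets : List (List Int)) : Prop :=
  targets.sum = 0 ∨
  ((∀ t ∈ targets, 0 ≤ t) ∧
  (∀ s ∈ button_sets, s.Nodup ∧ ∀ j ∈ s, 0 ≤ j ∧ j < (targets.length : Int)) ∧
  pvSolvable targets button_sets)
instance (targets : List Int) (button_sets : List (List Int)) : Decidable (Pre_min_presses_component targets button_sets) := by unfold Pre_min_presses_component; infer_instance
def pvWitness_min_presses_component : List Int × List (List Int) := ([1, 2], [[0, 1], [1]])
def Spec_min_presses_component (targets : List Int) (button_sets : List (List Int)) (out : Int) : Prop := out = min_presses_component_alt targets button_sets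
instance (targets : List Int) (button_sets : List (List Int)) (out : Int) : Decidable (Spec_min_presses_component targets button_sets out) := by unfold Spec_min_presses_component; infer_instance

-- ===== CLAIM (what is proved, stated in full; the proofs are below) =====
def Claim_equal_min_presses_component : Prop := ∀ (targets : List Int) (button_sets : List (List Int)), Dom_min_presses_component targets button_sets → Pre_min_presses_component targets button_sets → Spec_min_presses_component targets button_sets (min_presses_component targets button_sets)

-- ===== LEMMAS AND PROOFS =====

-- ---------- basic state facts ----------
def pvNonneg (r : List Int) : Prop := ∀ x ∈ r, 0 ≤ x

def pvSafeP (st s : List Int) : Prop := ∀ j ∈ s, pvGetI st j ≠ 0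

def pvGoodB (n : Nat) (B : List (List Int)) : Prop :=
  ∀ s ∈ B, s.Nodup ∧ ∀ j ∈ s, 0 ≤ j ∧ j < (n : Int)

theorem pvGetI_natCast (r : List Int) (k : Nat) (hk : k < r.length) :
    pvGetI r (k : Int) = r[k] := by
  simp [pvGetI, PySem.List.pyGet?_natCast, List.getElem?_eq_getElem hk]

theorem pvSetI_natCast (r : List Int) (k : Nat) (v : Int) :
    pvSetI r (k : Int) v = r.set k v := by
  simp [pvSetI]

theorem pvDecAt_length (r : List Int) (j t : Int) : (pvDecAt r j t).length = r.length := by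
  simp [pvDecAt, pvSetI, PySem.List.length_pySetD]

theorem pvDecAt_natCast (r : List Int) (k : Nat) (t : Int) (hk : k < r.length) :
    pvDecAt r (k : Int) t = r.set k (r[k] - t) := by
  simp [pvDecAt, pvSetI_natCast, pvGetI_natCast r k hk]

theorem pvPress_length (st s : List Int) : (pvPress st s).length = st.length := by
  induction s generalizing st with
  | nil => rfl
  | cons j s ih => simp [pvPress, List.foldl_cons] at *; rw [ih]; exact pvDecAt_length st j 1

theorem pvPress_cons (st : List Int) (j : Int) (s : List Int) :
    pvPress st (j :: s) = pvPress (pvDecAt st j 1) s := rfl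

theorem pvDecAt_sum (r : List Int) (j t : Int) (h0 : 0 ≤ j) (h1 : j < (r.length : Int)) :
    (pvDecAt r j t).sum = r.sum - t := by
  obtain ⟨k, rfl⟩ : ∃ k : Nat, j = (k : Int) := ⟨j.toNat, (Int.toNat_of_nonneg h0).symm⟩
  have hk : k < r.length := by exact_mod_cast h1
  rw [pvDecAt_natCast r k t hk]
  rw [List.sum_set]
  have := List.sum_take_add_sum_drop r k
  simp [hk]
  omega

theorem pvPress_sum (st s : List Int) (h : ∀ j ∈ s, 0 ≤ j ∧ j < (st.length : Int)) :
    (pvPress st s).sum = st.sum - s.length := by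
  induction s generalizing st with
  | nil => simp [pvPress]
  | cons j s ih =>
    rw [pvPress_cons]
    have hj := h j (by simp)
    rw [ih]
    · rw [pvDecAt_sum st j 1 hj.1 hj.2]
      simp only [List.length_cons]; push_cast; omega
    · intro x hx
      have := h x (by simp [hx])
      simpa [pvDecAt_length] using this


theorem pvGetI_decAt (r : List Int) (k : Nat) (j t : Int) (hk : k < r.length)
    (h0 : 0 ≤ j) (h1 : j < (r.length : Int)) :
    pvGetI (pvDecAt r j t) (k : Int) = if (k : Int) = j then pvGetI r k - t else pvGetI r k := by
  obtain ⟨kj, rfl⟩ : ∃ kj : Nat, j = (kj : Int) := ⟨j.toNat, (Int.toNat_of_nonneg h0).symm⟩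
  have hkj : kj < r.length := by exact_mod_cast h1
  rw [pvDecAt_natCast r kj t hkj]
  have hk' : k < (r.set kj (r[kj] - t)).length := by simpa using hk
  rw [pvGetI_natCast _ k hk', pvGetI_natCast r k hk]
  by_cases h : k = kj
  · subst h; simp
  · have hne : ¬ ((k : Int) = (kj : Int)) := by exact_mod_cast h
    simp only [List.getElem_set, if_neg (fun hh : kj = k => h hh.symm)]
    simp [hne]

theorem pvGetI_press (st s : List Int) (k : Nat) (hk : k < st.length)
    (hnd : s.Nodup) (hin : ∀ j ∈ s, 0 ≤ j ∧ j < (st.length : Int)) :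
    pvGetI (pvPress st s) (k : Int) =
      if (k : Int) ∈ s then pvGetI st k - 1 else pvGetI st k := by
  induction s generalizing st with
  | nil => simp [pvPress]
  | cons j s ih =>
    rw [pvPress_cons]
    have hj := hin j (by simp)
    have hlen : (pvDecAt st j 1).length = st.length := pvDecAt_length st j 1
    have hnd' : s.Nodup := (List.nodup_cons.mp hnd).2
    have hjs : j ∉ s := (List.nodup_cons.mp hnd).1
    rw [ih (pvDecAt st j 1) (by omega) hnd'
        (by intro x hx; have := hin x (by simp [hx]); simpa [hlen] using this)]
    rw [pvGetI_decAt st k j 1 hk hj.1 hj.2]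
    by_cases hkj : (k : Int) = j
    · subst hkj
      simp [hjs]
    · by_cases hks : (k : Int) ∈ s <;> simp [hks, hkj]

theorem pvPress_eq_pressB (st s : List Int) (hnd : s.Nodup)
    (hin : ∀ j ∈ s, 0 ≤ j ∧ j < (st.length : Int)) :
    pvPress st s = pvPressB st.length st s := by
  apply List.ext_getElem
  · simp [pvPress_length, pvPressB]
  · intro k hk1 hk2
    have hk : k < st.length := by simpa [pvPress_length] using hk1
    have h1 : (pvPress st s)[k] = pvGetI (pvPress st s) (k : Int) := by
      rw [pvGetI_natCast _ k (by simpa [pvPress_length] using hk)]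
    rw [h1, pvGetI_press st s k hk hnd hin]
    have h2 : (pvPressB st.length st s)[k] =
        (if (k : Int) ∈ s then pvGetI st (k : Int) - 1 else pvGetI st (k : Int)) := by
      simp only [pvPressB]
      rw [List.getElem_map]
      congr 1 <;> rw [List.getElem_range]
    rw [h2]

theorem pvNonneg_press (st s : List Int) (hN : pvNonneg st) (hS : pvSafeP st s)
    (hnd : s.Nodup) (hin : ∀ j ∈ s, 0 ≤ j ∧ j < (st.length : Int)) :
    pvNonneg (pvPress st s) := by
  intro x hx
  obtain ⟨k, hk, rfl⟩ := List.getElem_of_mem hx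
  have hk' : k < st.length := by simpa [pvPress_length] using hk
  have h1 : (pvPress st s)[k] = pvGetI (pvPress st s) (k : Int) := by
    rw [pvGetI_natCast _ k hk]
  rw [h1, pvGetI_press st s k hk' hnd hin]
  have hmem : st[k] ∈ st := List.getElem_mem hk'
  have h0 : 0 ≤ st[k] := hN _ hmem
  have hg : pvGetI st (k : Int) = st[k] := pvGetI_natCast st k hk'
  by_cases hks : (k : Int) ∈ s
  · have := hS _ hks
    rw [hg] at *
    simp [hks]
    omega
  · simp [hks, hg, h0]

-- componentwise upper bound by the targets (for counting states)
def pvLeSt (r t : List Int) : Prop := List.Forall₂ (fun x y => x ≤ y) r t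

theorem pvLeSt_press (st s t : List Int) (h : pvLeSt st t)
    (hnd : s.Nodup) (hin : ∀ j ∈ s, 0 ≤ j ∧ j < (st.length : Int)) :
    pvLeSt (pvPress st s) t := by
  have hlen := List.Forall₂.length_eq h
  have hlen2 : (pvPress st s).length = st.length := pvPress_length st s
  rw [pvLeSt, List.forall₂_iff_get] at h ⊢
  obtain ⟨hl, h⟩ := h
  refine ⟨by omega, ?_⟩
  intro k hk1 hk2
  simp only [List.get_eq_getElem] at h ⊢
  have hk : k < st.length := by omega
  have h1 : (pvPress st s)[k] = pvGetI (pvPress st s) (k : Int) := by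
    rw [pvGetI_natCast _ k hk1]
  rw [h1, pvGetI_press st s k hk hnd hin, pvGetI_natCast st k hk]
  have := h k hk hk2
  by_cases hks : (k : Int) ∈ s <;> simp [hks] <;> omega

-- ---------- paths of safe presses ----------
inductive pvPath (B : List (List Int)) (u : List Int) : Nat → List Int → Prop
  | refl : pvPath B u 0 u
  | step {k : Nat} {v s : List Int} :
      pvPath B u k v → s ∈ B → s ≠ [] → pvSafeP v s → pvPath B u (k+1) (pvPress v s)

def pvGoal (B : List (List Int)) (start : List Int) (k : Nat) : Prop :=
  ∃ v, pvPath B start k v ∧ v.sum = 0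

structure PvCtx where
  n : Nat
  targets : List Int
  B : List (List Int)
  Smax : Int
  ub : Option Int
  m : Nat

def pvStOk (C : PvCtx) (v : List Int) : Prop :=
  v.length = C.n ∧ pvNonneg v ∧ pvLeSt v C.targets

def PvCtxOk (C : PvCtx) : Prop :=
  C.targets.length = C.n ∧ pvNonneg C.targets ∧ pvGoodB C.n C.B ∧
  (∀ s ∈ C.B, (s.length : Int) ≤ C.Smax) ∧ 1 ≤ C.Smax

-- the extra optimality context: C.m is the optimum and C.ub an upper bound for it
def PvOptOk (C : PvCtx) : Prop :=
  (∀ u, C.ub = some u → (C.m : Int) ≤ u) ∧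
  pvGoal C.B C.targets C.m ∧ (∀ k, pvGoal C.B C.targets k → C.m ≤ k)

theorem pvStOk_targets (C : PvCtx) (hC : PvCtxOk C) : pvStOk C C.targets := by
  obtain ⟨h1, h2, _⟩ := hC
  refine ⟨h1, h2, ?_⟩
  exact List.forall₂_same.mpr (fun x _ => le_refl x)

theorem pvStOk_press (C : PvCtx) (hC : PvCtxOk C) (v s : List Int)
    (hv : pvStOk C v) (hs : s ∈ C.B) (hsafe : pvSafeP v s) : pvStOk C (pvPress v s) := by
  obtain ⟨hlen, hnn, hle⟩ := hv
  obtain ⟨hnd, hin⟩ := (hC.2.2.1 : pvGoodB C.n C.B) s hs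
  have hin' : ∀ j ∈ s, 0 ≤ j ∧ j < (v.length : Int) := by
    intro j hj; have := hin j hj; omega
  exact ⟨by rw [pvPress_length]; exact hlen,
    pvNonneg_press v s hnn hsafe hnd hin',
    pvLeSt_press v s C.targets hle hnd hin'⟩

theorem pvPath_stOk (C : PvCtx) (hC : PvCtxOk C) {u k v}
    (hp : pvPath C.B u k v) (hu : pvStOk C u) : pvStOk C v := by
  induction hp with
  | refl => exact hu
  | step hp hs hne hsafe ih => exact pvStOk_press C hC _ _ ih hs hsafe

theorem pvPath_trans {B u k v l w} (h1 : pvPath B u k v) (h2 : pvPath B v l w) :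
    pvPath B u (k + l) w := by
  induction h2 with
  | refl => exact h1
  | step hp hs hne hsafe ih => exact pvPath.step ih hs hne hsafe

theorem pvPath_cons {B u k w} (h : pvPath B u (k + 1) w) :
    ∃ s, s ∈ B ∧ s ≠ [] ∧ pvSafeP u s ∧ pvPath B (pvPress u s) k w := by
  generalize hk : k + 1 = k1 at h
  induction h generalizing k with
  | refl => omega
  | @step k' v s hp hs hne hsafe ih =>
    cases k with
    | zero =>
      have : k' = 0 := by omega
      subst this
      cases hp
      exact ⟨s, hs, hne, hsafe, pvPath.refl⟩
    | succ k2 =>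
      have hk' : k2 + 1 = k' := by omega
      obtain ⟨s0, hs0, hne0, hsafe0, hp0⟩ := ih hk'
      exact ⟨s0, hs0, hne0, hsafe0, pvPath.step hp0 hs hne hsafe⟩

theorem pvSum_nonneg {v : List Int} (h : pvNonneg v) : 0 ≤ v.sum :=
  List.sum_nonneg h

theorem pvPath_sum_le (C : PvCtx) (hC : PvCtxOk C) {u k v}
    (hp : pvPath C.B u k v) (hu : pvStOk C u) : (k : Int) + v.sum ≤ u.sum := by
  induction hp with
  | refl => simp
  | @step k' v' s hp hs hne hsafe ih =>
    have hst : pvStOk C v' := pvPath_stOk C hC hp hu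
    obtain ⟨hnd, hin⟩ := (hC.2.2.1 : pvGoodB C.n C.B) s hs
    have hlv : (v'.length : Int) = (C.n : Int) := by exact_mod_cast hst.1
    have hin' : ∀ j ∈ s, 0 ≤ j ∧ j < (v'.length : Int) := by
      intro j hj; have := hin j hj; omega
    rw [pvPress_sum v' s hin']
    have hs1 : 1 ≤ (s.length : Int) := by
      cases s with
      | nil => exact absurd rfl hne
      | cons a t => simp
    push_cast
    omega

theorem pvPath_sum_ge (C : PvCtx) (hC : PvCtxOk C) {u k v}
    (hp : pvPath C.B u k v) (hu : pvStOk C u) : u.sum ≤ v.sum + (k : Int) * C.Smax := by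
  induction hp with
  | refl => simp
  | @step k' v' s hp hs hne hsafe ih =>
    have hst : pvStOk C v' := pvPath_stOk C hC hp hu
    obtain ⟨hnd, hin⟩ := (hC.2.2.1 : pvGoodB C.n C.B) s hs
    have hlv : (v'.length : Int) = (C.n : Int) := by exact_mod_cast hst.1
    have hin' : ∀ j ∈ s, 0 ≤ j ∧ j < (v'.length : Int) := by
      intro j hj; have := hin j hj; omega
    rw [pvPress_sum v' s hin']
    have hsl : (s.length : Int) ≤ C.Smax := hC.2.2.2.1 s hs
    have : ((k' + 1 : Nat) : Int) * C.Smax = (k' : Int) * C.Smax + C.Smax := by push_cast; ring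
    omega

theorem pvHeur_le (C : PvCtx) (hC : PvCtxOk C) {v l w}
    (hp : pvPath C.B v l w) (hw : w.sum = 0) (hv : pvStOk C v) :
    pvHeur C.Smax v ≤ (l : Int) := by
  have hS : (1 : Int) ≤ C.Smax := hC.2.2.2.2
  have hge := pvPath_sum_ge C hC hp hv
  rw [hw] at hge
  unfold pvHeur
  by_cases h : v.sum = 0
  · simp [h]
  · simp only [beq_iff_eq, h, if_false]
    have h2 : PySem.Int.floordiv (v.sum + C.Smax - 1) C.Smax < (l : Int) + 1 := by
      rw [PySem.Int.floordiv_lt_iff_lt_mul (by omega)]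
      have hmul : ((l : Int) + 1) * C.Smax = (l : Int) * C.Smax + C.Smax := by ring
      omega
    omega

-- ---------- an exact cover yields a goal path ----------
theorem pvExists_pos (cs : List (List Int × Nat)) (h : 0 < (cs.map (fun p => p.2)).sum) :
    ∃ p ∈ cs, 0 < p.2 := by
  by_contra hc
  push Not at hc
  have h0 : (cs.map (fun p => p.2)).sum = 0 := by
    apply List.sum_eq_zero
    intro x hx
    obtain ⟨p, hp, rfl⟩ := List.mem_map.mp hx
    exact Nat.le_zero.mp (hc p hp)
  omega

theorem pvCover_path (C : PvCtx) (hC : PvCtxOk C) :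
    ∀ (N : Nat) (r : List Int) (cs : List (List Int × Nat)),
    pvStOk C r →
    (∀ p ∈ cs, p.1 ∈ C.B ∧ p.1 ≠ []) →
    (∀ k : Nat, k < C.n →
      pvGetI r (k : Int) = (cs.map (fun p => if (k : Int) ∈ p.1 then (p.2 : Int) else 0)).sum) →
    (cs.map (fun p => p.2)).sum = N →
    ∃ v, pvPath C.B r N v ∧ v.sum = 0 := by
  intro N
  induction N with
  | zero =>
    intro r cs hr hcs hcov hsum
    refine ⟨r, pvPath.refl, ?_⟩
    apply List.sum_eq_zero
    intro x hx
    obtain ⟨k, hk, rfl⟩ := List.getElem_of_mem hx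
    have hk' : k < C.n := by rw [← hr.1]; exact hk
    have hx0 := hcov k hk'
    rw [pvGetI_natCast r k hk] at hx0
    rw [hx0]
    apply List.sum_eq_zero
    intro y hy
    obtain ⟨p, hp, rfl⟩ := List.mem_map.mp hy
    have hp2 : p.2 = 0 := by
      by_contra h0
      have hle : p.2 ≤ (cs.map (fun p => p.2)).sum :=
        List.single_le_sum (by intro x _; exact Nat.zero_le x) _ (List.mem_map_of_mem hp)
      omega
    simp [hp2]
  | succ N ih =>
    intro r cs hr hcs hcov hsum
    obtain ⟨p, hp, hpos⟩ := pvExists_pos cs (by omega)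
    obtain ⟨l1, l2, rfl⟩ := List.append_of_mem hp
    have hsB : p.1 ∈ C.B := (hcs p (by simp)).1
    have hsne : p.1 ≠ [] := (hcs p (by simp)).2
    obtain ⟨hnd, hin⟩ := hC.2.2.1 p.1 hsB
    have hrlen : r.length = C.n := hr.1
    have hrlen' : (r.length : Int) = (C.n : Int) := by exact_mod_cast hrlen
    have hin' : ∀ j ∈ p.1, 0 ≤ j ∧ j < (r.length : Int) := by
      intro j hj; have := hin j hj; omega
    have hsafe : pvSafeP r p.1 := by
      intro j hj
      have hj' := hin j hj
      obtain ⟨kj, rfl⟩ : ∃ kj : Nat, j = (kj : Int) := ⟨j.toNat, (Int.toNat_of_nonneg hj'.1).symm⟩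
      have hkj : kj < C.n := by exact_mod_cast hj'.2
      rw [hcov kj hkj]
      have hsplit : ((l1 ++ p :: l2).map (fun q => if (kj : Int) ∈ q.1 then (q.2 : Int) else 0)).sum
          = (l1.map (fun q => if (kj : Int) ∈ q.1 then (q.2 : Int) else 0)).sum
            + (if (kj : Int) ∈ p.1 then (p.2 : Int) else 0)
            + (l2.map (fun q => if (kj : Int) ∈ q.1 then (q.2 : Int) else 0)).sum := by
        rw [List.map_append, List.map_cons, List.sum_append, List.sum_cons]; ring
      have hterm : (if (kj : Int) ∈ p.1 then (p.2 : Int) else 0) = (p.2 : Int) := by simp [hj]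
      have h1 : 0 ≤ (l1.map (fun q => if (kj : Int) ∈ q.1 then (q.2 : Int) else 0)).sum := by
        apply List.sum_nonneg; intro x hx
        obtain ⟨q, _, rfl⟩ := List.mem_map.mp hx
        split <;> positivity
      have h2 : 0 ≤ (l2.map (fun q => if (kj : Int) ∈ q.1 then (q.2 : Int) else 0)).sum := by
        apply List.sum_nonneg; intro x hx
        obtain ⟨q, _, rfl⟩ := List.mem_map.mp hx
        split <;> positivity
      rw [hsplit, hterm]
      have : (1 : Int) ≤ (p.2 : Int) := by exact_mod_cast hpos
      omega
    have hr' : pvStOk C (pvPress r p.1) := pvStOk_press C hC r p.1 hr hsB hsafe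
    have hcs' : ∀ q ∈ l1 ++ (p.1, p.2 - 1) :: l2, q.1 ∈ C.B ∧ q.1 ≠ [] := by
      intro q hq
      rcases List.mem_append.mp hq with h | h
      · exact hcs q (List.mem_append.mpr (Or.inl h))
      · rcases List.mem_cons.mp h with h | h
        · subst h; exact ⟨hsB, hsne⟩
        · exact hcs q (by simp [h])
    have hcov' : ∀ k : Nat, k < C.n →
        pvGetI (pvPress r p.1) (k : Int)
          = ((l1 ++ (p.1, p.2 - 1) :: l2).map
              (fun q => if (k : Int) ∈ q.1 then (q.2 : Int) else 0)).sum := by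
      intro k hk
      have hklen : k < r.length := by omega
      rw [pvGetI_press r p.1 k hklen hnd hin', hcov k hk]
      rw [List.map_append, List.map_cons, List.sum_append, List.sum_cons,
          List.map_append, List.map_cons, List.sum_append, List.sum_cons]
      have hcast : ((p.2 - 1 : Nat) : Int) = (p.2 : Int) - 1 := by omega
      by_cases hks : (k : Int) ∈ p.1 <;> simp [hks, hcast] <;> ring
    have hsum' : ((l1 ++ (p.1, p.2 - 1) :: l2).map (fun q => q.2)).sum = N := by
      rw [List.map_append, List.map_cons, List.sum_append, List.sum_cons]
      rw [List.map_append, List.map_cons, List.sum_append, List.sum_cons] at hsum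
      omega
    obtain ⟨v, hpath, hv⟩ := ih (pvPress r p.1) (l1 ++ (p.1, p.2 - 1) :: l2) hr' hcs' hcov' hsum'
    have hstep : pvPath C.B r 1 (pvPress r p.1) := pvPath.step pvPath.refl hsB hsne hsafe
    have hfull := pvPath_trans hstep hpath
    rw [Nat.add_comm] at hfull
    exact ⟨v, hfull, hv⟩

-- ---------- the heap pop: properties of pvPopMin ----------
theorem pvLeState_refl : ∀ a, pvLeState a a = true := by
  intro a
  induction a with
  | nil => rfl
  | cons x xs ih => simp [pvLeState, ih]

theorem pvLeState_total : ∀ a b, pvLeState a b = true ∨ pvLeState b a = true := by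
  intro a
  induction a with
  | nil => intro b; left; rfl
  | cons x xs ih =>
    intro b
    cases b with
    | nil => right; rfl
    | cons y ys =>
      simp only [pvLeState]
      rcases lt_trichotomy x y with h | h | h
      · left; simp [h]
      · subst h; simpa [lt_irrefl] using ih ys
      · right; simp [h]

theorem pvLeState_trans : ∀ a b c, pvLeState a b = true → pvLeState b c = true →
    pvLeState a c = true := by
  intro a
  induction a with
  | nil => intro b c _ _; rfl
  | cons x xs ih =>
    intro b c hab hbc
    cases b with
    | nil => simp [pvLeState] at hab
    | cons y ys =>
      cases c with
      | nil => simp [pvLeState] at hbc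
      | cons z zs =>
        simp only [pvLeState] at *
        split_ifs at * <;> try omega
        all_goals exact ih ys zs hab hbc

theorem pvLeTri_refl (x : Int × Int × List Int) : pvLeTri x x = true := by
  simp [pvLeTri, pvLeState_refl]

theorem pvLeTri_total (x y : Int × Int × List Int) :
    pvLeTri x y = true ∨ pvLeTri y x = true := by
  unfold pvLeTri
  rcases pvLeState_total x.2.2 y.2.2 with h | h <;> split_ifs <;> simp_all

theorem pvLeTri_trans (x y z : Int × Int × List Int) (h1 : pvLeTri x y = true)
    (h2 : pvLeTri y z = true) : pvLeTri x z = true := by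
  unfold pvLeTri at *
  split_ifs at * <;> try omega
  all_goals exact pvLeState_trans _ _ _ h1 h2

theorem pvLeTri_fst {x y : Int × Int × List Int} (h : pvLeTri x y = true) : x.1 ≤ y.1 := by
  unfold pvLeTri at h
  split_ifs at h <;> omega

theorem pvPopMin_none (pq : List (Int × Int × List Int)) :
    pvPopMin pq = none ↔ pq = [] := by
  cases pq with
  | nil => simp [pvPopMin]
  | cons x xs =>
    simp only [pvPopMin]
    cases h : pvPopMin xs with
    | none => simp
    | some p => cases p with | mk m rest => by_cases hle : pvLeTri x m <;> simp [hle]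

theorem pvPopMin_spec (pq : List (Int × Int × List Int)) (x : Int × Int × List Int)
    (rest : List (Int × Int × List Int)) (h : pvPopMin pq = some (x, rest)) :
    x ∈ pq ∧ pq.Perm (x :: rest) ∧ ∀ y ∈ pq, pvLeTri x y = true := by
  induction pq generalizing x rest with
  | nil => simp [pvPopMin] at h
  | cons a xs ih =>
    simp only [pvPopMin] at h
    cases hxs : pvPopMin xs with
    | none =>
      have hnil : xs = [] := (pvPopMin_none xs).mp hxs
      subst hnil
      rw [hxs] at h
      simp at h
      obtain ⟨rfl, rfl⟩ := h
      exact ⟨by simp, by simp, by intro y hy; simp at hy; subst hy; exact pvLeTri_refl _⟩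
    | some p =>
      obtain ⟨m, rest'⟩ := p
      rw [hxs] at h
      obtain ⟨hmem, hperm, hmin⟩ := ih m rest' hxs
      by_cases hle : pvLeTri a m = true
      · simp [hle] at h
        obtain ⟨rfl, rfl⟩ := h
        refine ⟨by simp, by simp, ?_⟩
        intro y hy
        rcases List.mem_cons.mp hy with rfl | hy
        · exact pvLeTri_refl _
        · exact pvLeTri_trans _ _ _ hle (hmin y hy)
      · simp [hle] at h
        obtain ⟨rfl, rfl⟩ := h
        have hp1 := hperm.cons a
        have hp2 := List.Perm.swap m a rest'
        refine ⟨by simp [hmem], hp1.trans hp2, ?_⟩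
        · intro y hy
          rcases List.mem_cons.mp hy with rfl | hy
          · exact (pvLeTri_total _ _).resolve_left hle
          · exact hmin y hy

-- ---------- the greedy upper bound is achieved by a real press sequence ----------
theorem pvGreedyPick_some (r : List Int) (B : List (List Int)) (cov t : Int) (s : List Int)
    (h : pvGreedyPick r B = (cov, t, some s)) :
    s ∈ B ∧ s ≠ [] ∧ pvBlocked r s = false ∧
      t = (PySem.List.min? (s.map (fun j => pvGetI r j)) (fun x => x)).getD 0 := by
  have main : ∀ (L : List (List Int)) (acc : Int × Int × Option (List Int)),
      (∀ s' ∈ L, s' ∈ B) →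
      (∀ s', acc.2.2 = some s' → s' ∈ B ∧ s' ≠ [] ∧ pvBlocked r s' = false ∧
        acc.2.1 = (PySem.List.min? (s'.map (fun j => pvGetI r j)) (fun x => x)).getD 0) →
      ∀ s', (L.foldl (fun acc s =>
        if s.isEmpty then acc
        else if pvBlocked r s then acc
        else
          let cov := (s.map (fun j => pvGetI r j)).sum
          if acc.1 < cov then
            (cov, (PySem.List.min? (s.map (fun j => pvGetI r j)) (fun x => x)).getD 0, some s)
          else acc) acc).2.2 = some s' →
        s' ∈ B ∧ s' ≠ [] ∧ pvBlocked r s' = false ∧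
        (L.foldl (fun acc s =>
        if s.isEmpty then acc
        else if pvBlocked r s then acc
        else
          let cov := (s.map (fun j => pvGetI r j)).sum
          if acc.1 < cov then
            (cov, (PySem.List.min? (s.map (fun j => pvGetI r j)) (fun x => x)).getD 0, some s)
          else acc) acc).2.1
          = (PySem.List.min? (s'.map (fun j => pvGetI r j)) (fun x => x)).getD 0 := by
    intro L
    induction L with
    | nil => intro acc _ hacc s' h'; exact hacc s' h'
    | cons a L ih =>
      intro acc hL hacc s' h'
      simp only [List.foldl_cons] at h' ⊢
      set acc' := (if a.isEmpty then acc
        else if pvBlocked r a then acc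
        else
          if acc.1 < (a.map (fun j => pvGetI r j)).sum then
            ((a.map (fun j => pvGetI r j)).sum,
              (PySem.List.min? (a.map (fun j => pvGetI r j)) (fun x => x)).getD 0, some a)
          else acc) with hacc'
      apply ih acc' (fun x hx => hL x (by simp [hx]))
      · intro s2 hs2
        rw [hacc'] at hs2 ⊢
        split_ifs at hs2 ⊢ with h1 h2 h3
        · exact hacc s2 hs2
        · exact hacc s2 hs2
        · simp at hs2
          subst hs2
          refine ⟨hL a (by simp), by simpa using h1, by simpa using h2, by simp⟩
        · exact hacc s2 hs2
      · exact h'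
  have h22 : (pvGreedyPick r B).2.2 = some s := by rw [h]
  have h21 : (pvGreedyPick r B).2.1 = t := by rw [h]
  unfold pvGreedyPick at h22 h21
  obtain ⟨hB, hne, hbl, hmin⟩ := main B ((-1 : Int), (0 : Int), (none : Option (List Int)))
    (fun x hx => hx) (by intro s' hs'; simp at hs') s h22
  exact ⟨hB, hne, hbl, by rw [← h21, hmin]⟩

theorem pvFoldDec_length (st s : List Int) (t : Int) :
    (s.foldl (fun a j => pvDecAt a j t) st).length = st.length := by
  induction s generalizing st with
  | nil => rfl
  | cons j s ih => simp only [List.foldl_cons]; rw [ih, pvDecAt_length]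

theorem pvGetI_foldDec (st s : List Int) (t : Int) (k : Nat) (hk : k < st.length)
    (hnd : s.Nodup) (hin : ∀ j ∈ s, 0 ≤ j ∧ j < (st.length : Int)) :
    pvGetI (s.foldl (fun a j => pvDecAt a j t) st) (k : Int) =
      if (k : Int) ∈ s then pvGetI st k - t else pvGetI st k := by
  induction s generalizing st with
  | nil => simp
  | cons j s ih =>
    simp only [List.foldl_cons]
    have hj := hin j (by simp)
    have hlen : (pvDecAt st j t).length = st.length := pvDecAt_length st j t
    have hnd' : s.Nodup := (List.nodup_cons.mp hnd).2
    have hjs : j ∉ s := (List.nodup_cons.mp hnd).1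
    rw [ih (pvDecAt st j t) (by omega) hnd'
        (by intro x hx; have := hin x (by simp [hx]); simpa [hlen] using this)]
    rw [pvGetI_decAt st k j t hk hj.1 hj.2]
    by_cases hkj : (k : Int) = j
    · subst hkj
      simp [hjs]
    · by_cases hks : (k : Int) ∈ s <;> simp [hks, hkj]

theorem pvFoldDec_succ (st s : List Int) (tn : Nat)
    (hnd : s.Nodup) (hin : ∀ j ∈ s, 0 ≤ j ∧ j < (st.length : Int)) :
    s.foldl (fun a j => pvDecAt a j ((tn + 2 : Nat) : Int)) st
      = s.foldl (fun a j => pvDecAt a j ((tn + 1 : Nat) : Int)) (pvPress st s) := by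
  have hlp : (pvPress st s).length = st.length := pvPress_length st s
  have hin' : ∀ j ∈ s, 0 ≤ j ∧ j < ((pvPress st s).length : Int) := by
    intro j hj; have := hin j hj; omega
  apply List.ext_getElem
  · rw [pvFoldDec_length, pvFoldDec_length, hlp]
  · intro k hk1 hk2
    have hk : k < st.length := by rw [pvFoldDec_length] at hk1; exact hk1
    have e1 : (s.foldl (fun a j => pvDecAt a j ((tn + 2 : Nat) : Int)) st)[k]
        = pvGetI (s.foldl (fun a j => pvDecAt a j ((tn + 2 : Nat) : Int)) st) (k : Int) := by
      rw [pvGetI_natCast _ k (by rw [pvFoldDec_length]; exact hk)]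
    have e2 : (s.foldl (fun a j => pvDecAt a j ((tn + 1 : Nat) : Int)) (pvPress st s))[k]
        = pvGetI (s.foldl (fun a j => pvDecAt a j ((tn + 1 : Nat) : Int)) (pvPress st s)) (k : Int) := by
      rw [pvGetI_natCast _ k (by rw [pvFoldDec_length, hlp]; exact hk)]
    rw [e1, e2, pvGetI_foldDec st s _ k hk hnd hin,
        pvGetI_foldDec (pvPress st s) s _ k (by omega) hnd hin',
        pvGetI_press st s k hk hnd hin]
    by_cases hks : (k : Int) ∈ s <;> simp [hks] <;> ring

theorem pvMultiPress (C : PvCtx) (hC : PvCtxOk C) (r s : List Int) (tn : Nat)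
    (hst : pvStOk C r) (hs : s ∈ C.B) (hne : s ≠ [])
    (hge : ∀ j ∈ s, ((tn + 1 : Nat) : Int) ≤ pvGetI r j) :
    pvPath C.B r (tn + 1) (s.foldl (fun a j => pvDecAt a j ((tn + 1 : Nat) : Int)) r) := by
  induction tn generalizing r with
  | zero =>
    have hsafe : pvSafeP r s := by
      intro j hj
      have := hge j hj
      simp at this
      omega
    have : s.foldl (fun a j => pvDecAt a j ((1 : Nat) : Int)) r = pvPress r s := by
      simp [pvPress]
    rw [this]
    exact pvPath.step pvPath.refl hs hne hsafe
  | succ tn ih =>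
    obtain ⟨hnd, hin0⟩ := hC.2.2.1 s hs
    have hrl : (r.length : Int) = (C.n : Int) := by exact_mod_cast hst.1
    have hin : ∀ j ∈ s, 0 ≤ j ∧ j < (r.length : Int) := by
      intro j hj; have := hin0 j hj; omega
    have hsafe : pvSafeP r s := by
      intro j hj
      have := hge j hj
      push_cast at this
      omega
    have hst' : pvStOk C (pvPress r s) := pvStOk_press C hC r s hst hs hsafe
    have hge' : ∀ j ∈ s, ((tn + 1 : Nat) : Int) ≤ pvGetI (pvPress r s) j := by
      intro j hj
      have hj' := hin j hj
      obtain ⟨kj, rfl⟩ : ∃ kj : Nat, j = (kj : Int) := ⟨j.toNat, (Int.toNat_of_nonneg hj'.1).symm⟩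
      have hkj : kj < r.length := by exact_mod_cast hj'.2
      rw [pvGetI_press r s kj hkj hnd hin]
      have := hge _ hj
      push_cast at this ⊢
      simp [hj]
      omega
    have hpath := ih (pvPress r s) hst' hge'
    rw [pvFoldDec_succ r s tn hnd hin]
    have := pvPath_trans (pvPath.step pvPath.refl hs hne hsafe) hpath
    simpa [Nat.add_comm] using this

theorem pvGreedy_sound (C : PvCtx) (hC : PvCtxOk C) :
    ∀ (fuel : Nat) (r : List Int) (acc res : Int),
    pvStOk C r →
    (∃ ka : Nat, (ka : Int) = acc ∧ pvPath C.B C.targets ka r) →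
    pvGreedyLoop C.B fuel r acc = some res →
    ∃ kr : Nat, (kr : Int) = res ∧ pvGoal C.B C.targets kr := by
  intro fuel
  induction fuel with
  | zero => intro r acc res _ _ h; simp [pvGreedyLoop] at h
  | succ fuel ih =>
    intro r acc res hst hpa hrun
    obtain ⟨ka, hka, hpath⟩ := hpa
    unfold pvGreedyLoop at hrun
    by_cases h0 : r.sum == 0
    · rw [if_pos h0] at hrun
      simp at hrun h0
      exact ⟨ka, by omega, r, hpath, h0⟩
    · rw [if_neg h0] at hrun
      rcases hpick : pvGreedyPick r C.B with ⟨cov, t, os⟩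
      rw [hpick] at hrun
      cases os with
      | none => simp at hrun
      | some s =>
        simp only at hrun
        obtain ⟨hsB, hsne, hbl, ht⟩ := pvGreedyPick_some r C.B cov t s hpick
        -- the minimum over the (nonempty) pressed values is itself ≥ 1
        have hvalsne : s.map (fun j => pvGetI r j) ≠ [] := by
          simpa using hsne
        obtain ⟨mv, hmv⟩ : ∃ mv, PySem.List.min? (s.map (fun j => pvGetI r j)) (fun x => x)
            = some mv := by
          cases hmm : PySem.List.min? (s.map (fun j => pvGetI r j)) (fun x => x) with
          | none => exact absurd ((PySem.List.min?_eq_none_iff _ _).mp hmm) hvalsne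
          | some mv => exact ⟨mv, rfl⟩
        have htmv : t = mv := by rw [ht, hmv]; rfl
        have hsafe : pvSafeP r s := by
          intro j hj
          intro hz
          have : pvBlocked r s = true := by
            unfold pvBlocked
            rw [List.any_eq_true]
            exact ⟨j, hj, by simp [hz]⟩
          rw [this] at hbl; simp at hbl
        have hge1 : ∀ j ∈ s, 1 ≤ pvGetI r j := by
          intro j hj
          have h1 := hsafe j hj
          obtain ⟨hnd, hin0⟩ := hC.2.2.1 s hsB
          have hj' := hin0 j hj
          obtain ⟨kj, rfl⟩ : ∃ kj : Nat, j = (kj : Int) :=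
            ⟨j.toNat, (Int.toNat_of_nonneg hj'.1).symm⟩
          have hkj : kj < r.length := by
            have : (r.length : Int) = (C.n : Int) := by exact_mod_cast hst.1
            exact_mod_cast (by omega : (kj : Int) < (r.length : Int))
          rw [pvGetI_natCast r kj hkj] at h1 ⊢
          have := hst.2.1 _ (List.getElem_mem hkj)
          omega
        have hmv1 : 1 ≤ mv := by
          have hm := PySem.List.min?_mem hmv
          obtain ⟨j, hj, rfl⟩ := List.mem_map.mp hm
          exact hge1 j hj
        have hmvle : ∀ j ∈ s, mv ≤ pvGetI r j := by
          intro j hj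
          have := PySem.List.min?_isMin hmv (pvGetI r j) (List.mem_map_of_mem hj)
          simpa using this
        obtain ⟨tn, htn⟩ : ∃ tn : Nat, mv = ((tn + 1 : Nat) : Int) :=
          ⟨(mv - 1).toNat, by omega⟩
        have hmp := pvMultiPress C hC r s tn hst hsB hsne
          (by intro j hj; rw [← htn]; exact hmvle j hj)
        have hpath' := pvPath_trans hpath hmp
        have hst2 := pvPath_stOk C hC hmp hst
        have := ih (s.foldl (fun a j => pvDecAt a j ((tn + 1 : Nat) : Int)) r) (acc + t) res
          hst2 ⟨ka + (tn + 1), by push_cast; omega, hpath'⟩ (by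
            rw [← hrun]
            congr 1
            rw [htmv, htn])
        exact this

-- ---------- counting distinct reachable states ----------
def pvEnc : List Int → List Int → Nat
  | [], _ => 0
  | _ :: _, [] => 0
  | t :: ts, x :: xs => x.toNat + (t.toNat + 1) * pvEnc ts xs

def pvNB (targets : List Int) : Nat := (targets.map (fun t => t.toNat + 1)).prod

theorem pvEnc_lt : ∀ (ts rs : List Int),
    List.Forall₂ (fun x y => 0 ≤ x ∧ x ≤ y) rs ts → pvEnc ts rs < pvNB ts := by
  intro ts
  induction ts with
  | nil =>
    intro rs h
    cases h
    simp [pvEnc, pvNB]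
  | cons t ts ih =>
    intro rs h
    cases h with
    | cons hxy h =>
      rename_i x xs
      have hx : x.toNat ≤ t.toNat := by omega
      have he := ih xs h
      simp only [pvEnc, pvNB, List.map_cons, List.prod_cons]
      unfold pvNB at he
      calc x.toNat + (t.toNat + 1) * pvEnc ts xs
          < (t.toNat + 1) * (pvEnc ts xs + 1) := by
            have : (t.toNat + 1) * (pvEnc ts xs + 1) = (t.toNat + 1) * pvEnc ts xs + t.toNat + 1 := by ring
            omega
        _ ≤ (t.toNat + 1) * (ts.map (fun t => t.toNat + 1)).prod := by
            exact Nat.mul_le_mul_left _ (by omega)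

theorem pvEnc_inj : ∀ (ts r1 r2 : List Int),
    List.Forall₂ (fun x y => 0 ≤ x ∧ x ≤ y) r1 ts →
    List.Forall₂ (fun x y => 0 ≤ x ∧ x ≤ y) r2 ts →
    pvEnc ts r1 = pvEnc ts r2 → r1 = r2 := by
  intro ts
  induction ts with
  | nil =>
    intro r1 r2 h1 h2 _
    cases h1; cases h2; rfl
  | cons t ts ih =>
    intro r1 r2 h1 h2 he
    cases h1 with
    | cons hx1 h1 =>
      cases h2 with
      | cons hx2 h2 =>
        rename_i x1 xs1 x2 xs2
        simp only [pvEnc] at he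
        have hm1 : x1.toNat < t.toNat + 1 := by omega
        have hm2 : x2.toNat < t.toNat + 1 := by omega
        have hmod : x1.toNat = x2.toNat := by
          have e1 : (x1.toNat + (t.toNat + 1) * pvEnc ts xs1) % (t.toNat + 1) = x1.toNat := by
            rw [Nat.add_mul_mod_self_left, Nat.mod_eq_of_lt hm1]
          have e2 : (x2.toNat + (t.toNat + 1) * pvEnc ts xs2) % (t.toNat + 1) = x2.toNat := by
            rw [Nat.add_mul_mod_self_left, Nat.mod_eq_of_lt hm2]
          rw [← e1, ← e2, he]
        have hx : x1 = x2 := by omega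
        have henc : pvEnc ts xs1 = pvEnc ts xs2 := by
          have : (t.toNat + 1) * pvEnc ts xs1 = (t.toNat + 1) * pvEnc ts xs2 := by omega
          exact Nat.eq_of_mul_eq_mul_left (by omega) this
        rw [hx, ih xs1 xs2 h1 h2 henc]

theorem pvStOk_forall₂ (C : PvCtx) (v : List Int) (hv : pvStOk C v) :
    List.Forall₂ (fun x y => 0 ≤ x ∧ x ≤ y) v C.targets := by
  obtain ⟨hlen, hnn, hle⟩ := hv
  rw [pvLeSt, List.forall₂_iff_get] at hle
  rw [List.forall₂_iff_get]
  obtain ⟨hl, hle⟩ := hle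
  refine ⟨hl, ?_⟩
  intro i h1 h2
  refine ⟨?_, by simpa using hle i h1 h2⟩
  simp only [List.get_eq_getElem]
  exact hnn _ (List.getElem_mem h1)

theorem pvKeys_card (C : PvCtx) (keys : List (List Int)) (hnd : keys.Nodup)
    (hst : ∀ k ∈ keys, pvStOk C k) : keys.length ≤ pvNB C.targets := by
  have hmapnd : (keys.map (pvEnc C.targets)).Nodup := by
    apply (List.nodup_map_iff_inj_on hnd).mpr
    intro x hx y hy hxy
    exact pvEnc_inj C.targets x y (pvStOk_forall₂ C x (hst x hx)) (pvStOk_forall₂ C y (hst y hy)) hxy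
  have hsub : (keys.map (pvEnc C.targets)).toFinset ⊆ Finset.range (pvNB C.targets) := by
    intro e he
    rw [List.mem_toFinset] at he
    obtain ⟨k, hk, rfl⟩ := List.mem_map.mp he
    rw [Finset.mem_range]
    exact pvEnc_lt C.targets k (pvStOk_forall₂ C k (hst k hk))
  have h1 : (keys.map (pvEnc C.targets)).toFinset.card = keys.length := by
    rw [List.toFinset_card_of_nodup hmapnd, List.length_map]
  have h2 := Finset.card_le_card hsub
  rw [h1, Finset.card_range] at h2
  exact h2

-- ---------- the A* potential ----------
def pvDictSum (d : PySem.Dict (List Int) Int) : Nat :=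
  (d.items.map (fun p => p.2.toNat)).sum

def pvMu (C : PvCtx) (pq : List (Int × Int × List Int)) (best : PySem.Dict (List Int) Int) : Nat :=
  pq.length + 2 * pvDictSum best
    + (2 * C.targets.sum.toNat + 5) * (pvNB C.targets + 1 - best.size)

theorem pvSumSubst (l : List (List Int × Int)) (k : List Int) (v b : Int)
    (hnd : (l.map Prod.fst).Nodup) (hmem : (k, b) ∈ l) :
    ((l.map (fun p => if p.1 == k then (k, v) else p)).map (fun p => p.2.toNat)).sum + b.toNat
      = (l.map (fun p => p.2.toNat)).sum + v.toNat := by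
  induction l with
  | nil => simp at hmem
  | cons a l ih =>
    have hka : k ∉ l.map Prod.fst ∨ a.1 ≠ k ∨ (k, b) ∈ l := by
      rcases List.mem_cons.mp hmem with rfl | hmem'
      · exact Or.inl (by simpa using (List.nodup_cons.mp hnd).1)
      · exact Or.inr (Or.inr hmem')
    rcases List.mem_cons.mp hmem with rfl | hmem'
    · have hknotin : ∀ p ∈ l, (p.1 == k) = false := by
        intro p hp
        have hni : k ∉ l.map Prod.fst := by simpa using (List.nodup_cons.mp hnd).1
        simp only [beq_eq_false_iff_ne, ne_eq]
        intro hpk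
        exact hni (by rw [← hpk]; exact List.mem_map_of_mem hp)
      have hid : (l.map (fun p => if p.1 == k then (k, v) else p)) = l := by
        apply List.map_congr_left (g := id) ?_ |>.trans (List.map_id l)
        intro p hp
        simp [hknotin p hp]
      simp only [List.map_cons, List.sum_cons, beq_self_eq_true, if_pos, hid]
      omega
    · have hak : (a.1 == k) = false := by
        have hkin : k ∈ l.map Prod.fst := List.mem_map_of_mem (f := Prod.fst) hmem'
        have hni : a.1 ∉ l.map Prod.fst := (List.nodup_cons.mp hnd).1
        simp only [beq_eq_false_iff_ne, ne_eq]
        intro hpk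
        exact hni (by rw [hpk]; exact hkin)
      have := ih (List.nodup_cons.mp hnd).2 hmem'
      simp only [List.map_cons, List.sum_cons, hak, Bool.false_eq_true, if_false]
      omega

theorem pvDictSum_insert_old (d : PySem.Dict (List Int) Int) (k : List Int) (v b : Int)
    (hnd : d.keys.Nodup) (hget : d.get? k = some b) :
    pvDictSum (d.insert k v) + b.toNat = pvDictSum d + v.toNat ∧ (d.insert k v).size = d.size := by
  have hmem := PySem.Dict.mem_items_of_get?_eq_some d hget
  have hcont : d.contains k = true := by
    rw [PySem.Dict.contains_eq_isSome_get?, hget]; rfl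
  constructor
  · unfold pvDictSum
    rw [PySem.Dict.items_insert_of_contains d v hcont]
    exact pvSumSubst d.items k v b hnd hmem
  · rw [PySem.Dict.size_insert]
    simp [hcont]

theorem pvDictSum_insert_new (d : PySem.Dict (List Int) Int) (k : List Int) (v : Int)
    (hget : d.get? k = none) :
    pvDictSum (d.insert k v) = pvDictSum d + v.toNat ∧ (d.insert k v).size = d.size + 1 := by
  have hcont : d.contains k = false := by
    rw [PySem.Dict.contains_eq_isSome_get?, hget]; rfl
  constructor
  · unfold pvDictSum
    rw [PySem.Dict.items_insert_of_not_contains d v hcont]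
    simp
  · rw [PySem.Dict.size_insert]
    simp [hcont]

-- ---------- the invariant of the A* loop ----------
def pvInv1 (C : PvCtx) (pq : List (Int × Int × List Int)) (best : PySem.Dict (List Int) Int) : Prop :=
  ∀ e ∈ pq, ∃ k : Nat, (k : Int) = e.2.1 ∧ pvPath C.B C.targets k e.2.2 ∧
    e.1 = e.2.1 + pvHeur C.Smax e.2.2 ∧ ∃ b, best.get? e.2.2 = some b ∧ b ≤ e.2.1

def pvInv2 (C : PvCtx) (best : PySem.Dict (List Int) Int) : Prop :=
  ∀ v b, best.get? v = some b → ∃ k : Nat, (k : Int) = b ∧ pvPath C.B C.targets k v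

def pvInvC (C : PvCtx) (pq : List (Int × Int × List Int)) (best : PySem.Dict (List Int) Int) : Prop :=
  ∀ v b, best.get? v = some b →
    ((b + pvHeur C.Smax v, b, v) ∈ pq) ∨ (pvFLeUb (b + pvHeur C.Smax v) C.ub = false) ∨
    (v.sum ≠ 0 ∧ ∀ s ∈ C.B, s ≠ [] → pvSafeP v s →
      ∃ b', best.get? (pvPress v s) = some b' ∧ b' ≤ b + 1)

def pvInv (C : PvCtx) (pq : List (Int × Int × List Int)) (best : PySem.Dict (List Int) Int) : Prop :=
  pvInv1 C pq best ∧ pvInv2 C best ∧ best.keys.Nodup ∧ pvInvC C pq best ∧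
    (∃ b0, best.get? C.targets = some b0 ∧ b0 ≤ 0)

theorem pvFLeUb_false {x : Int} {ub : Option Int} (h : pvFLeUb x ub = false) :
    ∃ u, ub = some u ∧ u < x := by
  cases ub with
  | none => simp [pvFLeUb] at h
  | some u => exact ⟨u, rfl, by simpa [pvFLeUb] using h⟩

-- key completeness argument: while the loop runs, some entry in the queue has f ≤ m
theorem pvChain (C : PvCtx) (hC : PvCtxOk C) (hOpt : PvOptOk C)
    (pq : List (Int × Int × List Int)) (best : PySem.Dict (List Int) Int)
    (hIC : pvInvC C pq best)
    (hstart : ∃ b0, best.get? C.targets = some b0 ∧ b0 ≤ 0) :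
    ∃ e ∈ pq, e.1 ≤ (C.m : Int) := by
  obtain ⟨w, hw, hwsum⟩ := hOpt.2.1
  suffices aux : ∀ (l : Nat) (v : List Int) (b : Int), pvPath C.B v l w → pvStOk C v →
      best.get? v = some b → b ≤ (C.m : Int) - (l : Int) → ∃ e ∈ pq, e.1 ≤ (C.m : Int) by
    obtain ⟨b0, hb0, hb0le⟩ := hstart
    exact aux C.m C.targets b0 hw (pvStOk_targets C hC) hb0 (by omega)
  intro l
  induction l with
  | zero =>
    intro v b hp hv hb hble
    cases hp
    rcases hIC w b hb with h1 | h2 | h3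
    · refine ⟨_, h1, ?_⟩
      have hh : pvHeur C.Smax w = 0 := by simp [pvHeur, hwsum]
      simp only [hh]
      omega
    · obtain ⟨u, hu, hult⟩ := pvFLeUb_false h2
      have hmu := hOpt.1 u hu
      have hh : pvHeur C.Smax w = 0 := by simp [pvHeur, hwsum]
      rw [hh] at hult
      omega
    · exact absurd hwsum h3.1
  | succ l ih =>
    intro v b hp hv hb hble
    have hheur : pvHeur C.Smax v ≤ ((l + 1 : Nat) : Int) := pvHeur_le C hC hp hwsum hv
    rcases hIC v b hb with h1 | h2 | h3
    · refine ⟨_, h1, ?_⟩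
      push_cast at hheur hble ⊢
      omega
    · obtain ⟨u, hu, hult⟩ := pvFLeUb_false h2
      have hmu := hOpt.1 u hu
      push_cast at hheur hble
      omega
    · obtain ⟨s, hsB, hsne, hsafe, hp'⟩ := pvPath_cons hp
      obtain ⟨b', hb', hb'le⟩ := h3.2 s hsB hsne hsafe
      have hv' : pvStOk C (pvPress v s) := pvStOk_press C hC v s hv hsB hsafe
      apply ih (pvPress v s) b' hp' hv' hb'
      push_cast at hble ⊢
      omega

-- ---------- preservation of the invariant through one button expansion ----------
theorem pvBlocked_eq_false_iff (st s : List Int) :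
    pvBlocked st s = false ↔ pvSafeP st s := by
  unfold pvBlocked pvSafeP
  rw [List.any_eq_false]
  constructor
  · intro h j hj; have := h j hj; simpa using this
  · intro h j hj; simpa using h j hj

def pvMid (C : PvCtx) (g b : Int) (st : List Int) (rest : List (Int × Int × List Int))
    (best0 : PySem.Dict (List Int) Int) (done : List (List Int))
    (acc : List (Int × Int × List Int) × PySem.Dict (List Int) Int) : Prop :=
  pvInv1 C acc.1 acc.2 ∧ pvInv2 C acc.2 ∧ acc.2.keys.Nodup ∧
  (∀ e ∈ rest, e ∈ acc.1) ∧
  (∀ v bv, best0.get? v = some bv → ∃ bv', acc.2.get? v = some bv' ∧ bv' ≤ bv) ∧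
  (∀ v bv, acc.2.get? v = some bv → v ≠ st →
    ((bv + pvHeur C.Smax v, bv, v) ∈ acc.1) ∨ (pvFLeUb (bv + pvHeur C.Smax v) C.ub = false) ∨
    (v.sum ≠ 0 ∧ ∀ s ∈ C.B, s ≠ [] → pvSafeP v s →
      ∃ b', acc.2.get? (pvPress v s) = some b' ∧ b' ≤ bv + 1)) ∧
  (acc.2.get? st = some b) ∧
  (∀ s ∈ done, s ≠ [] → pvSafeP st s → ∃ b', acc.2.get? (pvPress st s) = some b' ∧ b' ≤ g + 1) ∧
  pvMu C acc.1 acc.2 ≤ pvMu C rest best0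

theorem pvSize_le (C : PvCtx) (hC : PvCtxOk C) (d : PySem.Dict (List Int) Int)
    (hnd : d.keys.Nodup) (hI2 : pvInv2 C d) : d.size ≤ pvNB C.targets := by
  have hkeys : ∀ kk ∈ d.keys, pvStOk C kk := by
    intro kk hkk
    cases hget : d.get? kk with
    | none =>
      exact absurd hkk ((PySem.Dict.get?_eq_none_iff_not_mem_keys d kk).mp hget)
    | some bv =>
      obtain ⟨k, _, hp⟩ := hI2 kk bv hget
      exact pvPath_stOk C hC hp (pvStOk_targets C hC)
  have := pvKeys_card C d.keys hnd hkeys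
  simpa [PySem.Dict.size, PySem.Dict.keys] using this

theorem pvExpandIns (C : PvCtx) (hC : PvCtxOk C)
    (g b : Int) (k : Nat) (st : List Int)
    (rest : List (Int × Int × List Int)) (best0 : PySem.Dict (List Int) Int)
    (hkg : (k : Int) = g) (hpst : pvPath C.B C.targets k st) (hstOk : pvStOk C st)
    (done : List (List Int))
    (acc : List (Int × Int × List Int) × PySem.Dict (List Int) Int)
    (s : List Int) (hs : s ∈ C.B) (hsne : s ≠ []) (hsafe : pvSafeP st s)
    (hmid : pvMid C g b st rest best0 done acc)
    (hdich : acc.2.get? (pvPress st s) = none ∨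
      (∃ b2, acc.2.get? (pvPress st s) = some b2 ∧ ¬ b2 ≤ g + 1)) :
    pvMid C g b st rest best0 (done ++ [s])
      (if pvFLeUb (g + 1 + pvHeur C.Smax (pvPress st s)) C.ub
        then ((g + 1 + pvHeur C.Smax (pvPress st s), g + 1, pvPress st s) :: acc.1,
              acc.2.insert (pvPress st s) (g + 1))
        else (acc.1, acc.2.insert (pvPress st s) (g + 1))) := by
  obtain ⟨hInv1, hInv2, hnd, hrest, hmono, hcl, hbst, hdone, hmu⟩ := hmid
  obtain ⟨hsnd, hsin0⟩ := hC.2.2.1 s hs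
  have hstl : (st.length : Int) = (C.n : Int) := by exact_mod_cast hstOk.1
  have hsin : ∀ j ∈ s, 0 ≤ j ∧ j < (st.length : Int) := by
    intro j hj; have := hsin0 j hj; omega
  have hsl1 : (1 : Int) ≤ (s.length : Int) := by
    cases s with
    | nil => exact absurd rfl hsne
    | cons a t => simp
  have hnsne : pvPress st s ≠ st := by
    intro he
    have := pvPress_sum st s hsin
    rw [he] at this
    omega
  have hpns : pvPath C.B C.targets (k + 1) (pvPress st s) := pvPath.step hpst hs hsne hsafe
  have hnsOk : pvStOk C (pvPress st s) := pvStOk_press C hC st s hstOk hs hsafe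
  have hg0 : 0 ≤ g := by omega
  have hkle : (k : Int) + 1 ≤ C.targets.sum := by
    have h1 := pvPath_sum_le C hC hpns (pvStOk_targets C hC)
    have h2 := pvSum_nonneg hnsOk.2.1
    push_cast at h1
    omega
  have hmono' : ∀ v bv, acc.2.get? v = some bv →
      ∃ bv', (acc.2.insert (pvPress st s) (g + 1)).get? v = some bv' ∧ bv' ≤ bv := by
    intro v bv hv
    by_cases hveq : v = pvPress st s
    · subst hveq
      rcases hdich with hd | ⟨b2, hb2, hb2gt⟩
      · rw [hv] at hd; cases hd
      · rw [hv] at hb2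
        cases hb2
        exact ⟨g + 1, PySem.Dict.get?_insert_self _ _ _, by omega⟩
    · exact ⟨bv, by rw [PySem.Dict.get?_insert_of_ne _ _ hveq]; exact hv, le_refl _⟩
  have hInv2' : pvInv2 C (acc.2.insert (pvPress st s) (g + 1)) := by
    intro v bv hv
    by_cases hveq : v = pvPress st s
    · subst hveq
      rw [PySem.Dict.get?_insert_self] at hv
      cases hv
      exact ⟨k + 1, by push_cast; omega, hpns⟩
    · rw [PySem.Dict.get?_insert_of_ne _ _ hveq] at hv
      exact hInv2 v bv hv
  have hnd' : (acc.2.insert (pvPress st s) (g + 1)).keys.Nodup :=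
    PySem.Dict.nodup_keys_insert _ _ _ hnd
  have hbst' : (acc.2.insert (pvPress st s) (g + 1)).get? st = some b := by
    rw [PySem.Dict.get?_insert_of_ne _ _ (Ne.symm hnsne)]
    exact hbst
  have hdone' : ∀ s' ∈ done ++ [s], s' ≠ [] → pvSafeP st s' →
      ∃ b', (acc.2.insert (pvPress st s) (g + 1)).get? (pvPress st s') = some b' ∧ b' ≤ g + 1 := by
    intro s' hs' hne' hsafe'
    rcases List.mem_append.mp hs' with h | h
    · obtain ⟨b', hb', hb'le⟩ := hdone s' h hne' hsafe'
      obtain ⟨b'', hb'', hb''le⟩ := hmono' _ b' hb'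
      exact ⟨b'', hb'', by omega⟩
    · simp at h
      subst h
      exact ⟨g + 1, PySem.Dict.get?_insert_self _ _ _, le_refl _⟩
  have hmono0 : ∀ v bv, best0.get? v = some bv →
      ∃ bv', (acc.2.insert (pvPress st s) (g + 1)).get? v = some bv' ∧ bv' ≤ bv := by
    intro v bv hv
    obtain ⟨b1, hb1, hb1le⟩ := hmono v bv hv
    obtain ⟨b2', hb2', hb2'le⟩ := hmono' v b1 hb1
    exact ⟨b2', hb2', by omega⟩
  -- the potential strictly accounts for the insertion
  have hmuIns : pvMu C acc.1 (acc.2.insert (pvPress st s) (g + 1)) + 1 ≤ pvMu C acc.1 acc.2 := by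
    rcases hdich with hd | ⟨b2, hb2, hb2gt⟩
    · -- fresh key
      obtain ⟨hsumEq, hsz⟩ := pvDictSum_insert_new acc.2 (pvPress st s) (g + 1) hd
      have hszle : acc.2.size ≤ pvNB C.targets := pvSize_le C hC acc.2 hnd hInv2
      unfold pvMu
      rw [hsumEq, hsz]
      have hngle : (g + 1).toNat ≤ C.targets.sum.toNat := by omega
      set W := 2 * C.targets.sum.toNat + 5 with hW
      set d := pvNB C.targets + 1 - acc.2.size with hd2
      have hd1 : 1 ≤ d := by omega
      have hWd : W * d = W * (d - 1) + W := by
        have : d - 1 + 1 = d := by omega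
        calc W * d = W * ((d - 1) + 1) := by rw [this]
          _ = W * (d - 1) + W := by ring
      have hdd : pvNB C.targets + 1 - (acc.2.size + 1) = d - 1 := by omega
      rw [hdd]
      omega
    · -- overwrite a strictly larger value
      obtain ⟨hsumEq, hsz⟩ := pvDictSum_insert_old acc.2 (pvPress st s) (g + 1) b2 hnd hb2
      have hb2pos : 0 ≤ b2 := by
        obtain ⟨k2, hk2, _⟩ := hInv2 _ b2 hb2
        omega
      unfold pvMu
      rw [hsz]
      have : pvDictSum (acc.2.insert (pvPress st s) (g + 1)) + 1 ≤ pvDictSum acc.2 := by omega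
      omega
  have hInv1keep : ∀ (pq' : List (Int × Int × List Int)),
      (∀ e ∈ acc.1, e ∈ pq') →
      ∀ e ∈ acc.1, ∃ kk : Nat, (kk : Int) = e.2.1 ∧ pvPath C.B C.targets kk e.2.2 ∧
        e.1 = e.2.1 + pvHeur C.Smax e.2.2 ∧
        ∃ bb, (acc.2.insert (pvPress st s) (g + 1)).get? e.2.2 = some bb ∧ bb ≤ e.2.1 := by
    intro pq' _ e he
    obtain ⟨kk, hkk, hpp, hff, bb, hbb, hbble⟩ := hInv1 e he
    obtain ⟨bb', hbb', hbb'le⟩ := hmono' _ bb hbb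
    exact ⟨kk, hkk, hpp, hff, bb', hbb', by omega⟩
  have hclkeep : ∀ (pq' : List (Int × Int × List Int)),
      (∀ e ∈ acc.1, e ∈ pq') →
      ((g + 1 + pvHeur C.Smax (pvPress st s), g + 1, pvPress st s) ∈ pq' ∨
        pvFLeUb (g + 1 + pvHeur C.Smax (pvPress st s)) C.ub = false) →
      ∀ v bv, (acc.2.insert (pvPress st s) (g + 1)).get? v = some bv → v ≠ st →
      ((bv + pvHeur C.Smax v, bv, v) ∈ pq') ∨ (pvFLeUb (bv + pvHeur C.Smax v) C.ub = false) ∨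
      (v.sum ≠ 0 ∧ ∀ s' ∈ C.B, s' ≠ [] → pvSafeP v s' →
        ∃ b', (acc.2.insert (pvPress st s) (g + 1)).get? (pvPress v s') = some b' ∧ b' ≤ bv + 1) := by
    intro pq' hsub hnew v bv hv hvst
    by_cases hveq : v = pvPress st s
    · subst hveq
      rw [PySem.Dict.get?_insert_self] at hv
      cases hv
      rcases hnew with h | h
      · exact Or.inl h
      · exact Or.inr (Or.inl h)
    · rw [PySem.Dict.get?_insert_of_ne _ _ hveq] at hv
      rcases hcl v bv hv hvst with h1 | h2 | h3
      · exact Or.inl (hsub _ h1)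
      · exact Or.inr (Or.inl h2)
      · refine Or.inr (Or.inr ⟨h3.1, ?_⟩)
        intro s' hs' hne' hsafe'
        obtain ⟨b', hb', hb'le⟩ := h3.2 s' hs' hne' hsafe'
        obtain ⟨b'', hb'', hb''le⟩ := hmono' _ b' hb'
        exact ⟨b'', hb'', by omega⟩
  by_cases hpu : pvFLeUb (g + 1 + pvHeur C.Smax (pvPress st s)) C.ub = true
  · rw [if_pos hpu]
    refine ⟨?_, hInv2', hnd', ?_, hmono0, ?_, hbst', hdone', ?_⟩
    · intro e he
      rcases List.mem_cons.mp he with rfl | he'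
      · exact ⟨k + 1, by push_cast; omega, hpns, by simp, g + 1,
          PySem.Dict.get?_insert_self _ _ _, le_refl _⟩
      · exact hInv1keep acc.1 (fun e h => h) e he'
    · intro e he
      exact List.mem_cons_of_mem _ (hrest e he)
    · exact hclkeep _ (fun e h => List.mem_cons_of_mem _ h) (Or.inl (List.mem_cons_self))
    · show pvMu C ((g + 1 + pvHeur C.Smax (pvPress st s), g + 1, pvPress st s) :: acc.1)
          (acc.2.insert (pvPress st s) (g + 1)) ≤ pvMu C rest best0
      have hcons : pvMu C ((g + 1 + pvHeur C.Smax (pvPress st s), g + 1, pvPress st s) :: acc.1)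
          (acc.2.insert (pvPress st s) (g + 1))
          = pvMu C acc.1 (acc.2.insert (pvPress st s) (g + 1)) + 1 := by
        unfold pvMu
        simp [List.length_cons]
        omega
      omega
  · rw [if_neg hpu]
    refine ⟨?_, hInv2', hnd', hrest, hmono0, ?_, hbst', hdone', ?_⟩
    · exact hInv1keep acc.1 (fun e h => h)
    · exact hclkeep _ (fun e h => h) (Or.inr (by simpa using hpu))
    · show pvMu C acc.1 (acc.2.insert (pvPress st s) (g + 1)) ≤ pvMu C rest best0
      omega

theorem pvExpandStep (C : PvCtx) (hC : PvCtxOk C)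
    (g b : Int) (k : Nat) (st : List Int)
    (rest : List (Int × Int × List Int)) (best0 : PySem.Dict (List Int) Int)
    (hkg : (k : Int) = g) (hpst : pvPath C.B C.targets k st) (hstOk : pvStOk C st)
    (hbleg : b ≤ g)
    (done : List (List Int))
    (acc : List (Int × Int × List Int) × PySem.Dict (List Int) Int)
    (s : List Int) (hs : s ∈ C.B)
    (hmid : pvMid C g b st rest best0 done acc) :
    pvMid C g b st rest best0 (done ++ [s]) (pvExpand C.Smax C.ub g st acc s) := by
  have hdone_ext_same :
      (∀ s' ∈ done ++ [s], s' ≠ [] → pvSafeP st s' →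
        ∃ b', acc.2.get? (pvPress st s') = some b' ∧ b' ≤ g + 1) →
      pvMid C g b st rest best0 (done ++ [s]) acc := by
    intro hd
    obtain ⟨h1, h2, h3, h4, h5, h6, h7, _, h9⟩ := hmid
    exact ⟨h1, h2, h3, h4, h5, h6, h7, hd, h9⟩
  have hbst := hmid.2.2.2.2.2.2.1
  unfold pvExpand
  by_cases hbl : pvBlocked st s
  · rw [if_pos hbl]
    apply hdone_ext_same
    intro s' hs' hne' hsafe'
    rcases List.mem_append.mp hs' with h | h
    · exact hmid.2.2.2.2.2.2.2.1 s' h hne' hsafe'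
    · simp at h
      subst h
      rw [← pvBlocked_eq_false_iff] at hsafe'
      rw [hsafe'] at hbl
      simp at hbl
  · rw [if_neg hbl]
    have hsafe : pvSafeP st s := (pvBlocked_eq_false_iff st s).mp (by simpa using hbl)
    simp only
    cases hget : acc.2.get? (pvPress st s) with
    | some b2 =>
      by_cases hb2 : b2 ≤ g + 1
      · simp only [decide_eq_true_eq, hb2, if_pos]
        apply hdone_ext_same
        intro s' hs' hne' hsafe'
        rcases List.mem_append.mp hs' with h | h
        · exact hmid.2.2.2.2.2.2.2.1 s' h hne' hsafe'
        · simp at h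
          subst h
          exact ⟨b2, hget, hb2⟩
      · simp only [decide_eq_true_eq, hb2, if_false]
        have hsne : s ≠ [] := by
          intro hnil
          subst hnil
          have he : pvPress st ([] : List Int) = st := rfl
          rw [he, hbst] at hget
          cases hget
          omega
        exact pvExpandIns C hC g b k st rest best0 hkg hpst hstOk done acc s hs
          hsne hsafe hmid (Or.inr ⟨b2, hget, hb2⟩)
    | none =>
      simp only [Bool.false_eq_true, if_false]
      have hsne : s ≠ [] := by
        intro hnil
        subst hnil
        have he : pvPress st ([] : List Int) = st := rfl
        rw [he, hbst] at hget
        cases hget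
      exact pvExpandIns C hC g b k st rest best0 hkg hpst hstOk done acc s hs
        hsne hsafe hmid (Or.inl hget)

theorem pvExpandFold (C : PvCtx) (hC : PvCtxOk C)
    (g b : Int) (k : Nat) (st : List Int)
    (rest : List (Int × Int × List Int)) (best0 : PySem.Dict (List Int) Int)
    (hkg : (k : Int) = g) (hpst : pvPath C.B C.targets k st) (hstOk : pvStOk C st)
    (hbleg : b ≤ g) :
    ∀ (L : List (List Int)) (done : List (List Int))
      (acc : List (Int × Int × List Int) × PySem.Dict (List Int) Int),
    (∀ s ∈ L, s ∈ C.B) →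
    pvMid C g b st rest best0 done acc →
    pvMid C g b st rest best0 (done ++ L) (L.foldl (pvExpand C.Smax C.ub g st) acc) := by
  intro L
  induction L with
  | nil => intro done acc _ h; simpa using h
  | cons s L ih =>
    intro done acc hL h
    have hstep := pvExpandStep C hC g b k st rest best0 hkg hpst hstOk hbleg done acc s
      (hL s (by simp)) h
    have := ih (done ++ [s]) (pvExpand C.Smax C.ub g st acc s) (fun x hx => hL x (by simp [hx]))
      hstep
    simpa using this

-- ---------- the A* loop returns the optimum ----------
theorem pvAstar_loop (C : PvCtx) (hC : PvCtxOk C) (hOpt : PvOptOk C) :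
    ∀ (fuel : Nat) (pq : List (Int × Int × List Int)) (best : PySem.Dict (List Int) Int),
    pvInv C pq best → pvMu C pq best < fuel →
    pvAstar C.B C.Smax C.ub fuel pq best = (C.m : Int) := by
  intro fuel
  induction fuel with
  | zero => intro pq best _ hmu; omega
  | succ fuel ih =>
    intro pq best hI hmu
    obtain ⟨hInv1, hInv2, hnd, hIC, hstart⟩ := hI
    obtain ⟨E, hEpq, hEle⟩ := pvChain C hC hOpt pq best hIC hstart
    cases hpop : pvPopMin pq with
    | none =>
      rw [pvPopMin_none] at hpop
      subst hpop
      simp at hEpq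
    | some pr =>
      obtain ⟨⟨f, g, st⟩, rest⟩ := pr
      obtain ⟨hmem, hperm, hmin⟩ := pvPopMin_spec pq _ _ hpop
      obtain ⟨k, hkg, hpst, hf, b, hbst, hbleg⟩ := hInv1 _ hmem
      have hstOk : pvStOk C st := pvPath_stOk C hC hpst (pvStOk_targets C hC)
      have hfm : f ≤ (C.m : Int) := le_trans (pvLeTri_fst (hmin E hEpq)) hEle
      show pvAstar C.B C.Smax C.ub (fuel + 1) pq best = (C.m : Int)
      rw [pvAstar, hpop]
      dsimp only
      by_cases hs0 : st.sum = 0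
      · rw [if_pos (by simpa using hs0)]
        have hmk : C.m ≤ k := hOpt.2.2 k ⟨st, hpst, hs0⟩
        have hh0 : pvHeur C.Smax st = 0 := by simp [pvHeur, hs0]
        simp only at hf hkg
        rw [hh0] at hf
        omega
      · rw [if_neg (by simpa using hs0)]
        have hgtub : pvFGtUb f C.ub = false := by
          cases hub : C.ub with
          | none => rfl
          | some u =>
            have := hOpt.1 u hub
            simp only [pvFGtUb, decide_eq_false_iff_not]
            omega
        rw [hgtub]
        simp only [Bool.false_eq_true, if_false]
        have hmid0 : pvMid C g b st rest best [] (rest, best) := by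
          refine ⟨?_, hInv2, hnd, fun e h => h, fun v bv h => ⟨bv, h, le_refl _⟩, ?_, ?_, ?_, ?_⟩
          · intro e he
            exact hInv1 e ((hperm.mem_iff).mpr (List.mem_cons_of_mem _ he))
          · intro v bv hv hvst
            rcases hIC v bv hv with h1 | h2 | h3
            · left
              have : (bv + pvHeur C.Smax v, bv, v) ∈ (f, g, st) :: rest :=
                (hperm.mem_iff).mp h1
              rcases List.mem_cons.mp this with he | he
              · exfalso
                apply hvst
                have := congrArg (fun p => p.2.2) he
                simpa using this
              · exact he
            · exact Or.inr (Or.inl h2)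
            · exact Or.inr (Or.inr h3)
          · simpa using hbst
          · intro s' hs'
            simp at hs'
          · exact le_refl _
        have hfold := pvExpandFold C hC g b k st rest best hkg hpst hstOk hbleg
          C.B [] (rest, best) (fun s h => h) hmid0
        simp only [List.nil_append] at hfold
        obtain ⟨hInv1', hInv2', hnd', hrest', hmono', hcl', hbst', hdone', hmu'⟩ := hfold
        have hlen : pq.length = rest.length + 1 := by
          have := hperm.length_eq
          simpa using this
        have hInvNew : pvInv C (C.B.foldl (pvExpand C.Smax C.ub g st) (rest, best)).1
            (C.B.foldl (pvExpand C.Smax C.ub g st) (rest, best)).2 := by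
          refine ⟨hInv1', hInv2', hnd', ?_, ?_⟩
          · -- closure
            intro v bv hv
            by_cases hvst : v = st
            · subst hvst
              rw [hbst'] at hv
              cases hv
              by_cases hgb : b = g
              · refine Or.inr (Or.inr ⟨hs0, ?_⟩)
                intro s' hsB' hne' hsafe'
                obtain ⟨b', hb', hb'le⟩ := hdone' s' hsB' hne' hsafe'
                exact ⟨b', hb', by omega⟩
              · rcases hIC v b hbst with h1 | h2 | h3
                · left
                  have hin : (b + pvHeur C.Smax v, b, v) ∈ (f, g, v) :: rest :=
                    (hperm.mem_iff).mp h1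
                  rcases List.mem_cons.mp hin with he | he
                  · exfalso
                    apply hgb
                    have := congrArg (fun p => p.2.1) he
                    simpa using this
                  · exact hrest' _ he
                · exact Or.inr (Or.inl h2)
                · refine Or.inr (Or.inr ⟨h3.1, ?_⟩)
                  intro s' hsB' hne' hsafe'
                  obtain ⟨b1, hb1, hb1le⟩ := h3.2 s' hsB' hne' hsafe'
                  obtain ⟨b2, hb2, hb2le⟩ := hmono' _ b1 hb1
                  exact ⟨b2, hb2, by omega⟩
            · exact hcl' v bv hv hvst
          · obtain ⟨b0, hb0, hb0le⟩ := hstart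
            obtain ⟨b0', hb0', hb0'le⟩ := hmono' _ b0 hb0
            exact ⟨b0', hb0', by omega⟩
        have hmuNew : pvMu C (C.B.foldl (pvExpand C.Smax C.ub g st) (rest, best)).1
            (C.B.foldl (pvExpand C.Smax C.ub g st) (rest, best)).2 < fuel := by
          have h1 : pvMu C rest best + 1 = pvMu C pq best := by
            unfold pvMu
            omega
          omega
        exact ih _ _ hInvNew hmuNew

-- ---------- the BFS layers compute the optimum ----------
theorem pvSafeB_iff (st s : List Int) : pvSafeB st s = true ↔ pvSafeP st s := by
  unfold pvSafeB pvSafeP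
  rw [List.all_eq_true]
  constructor
  · intro h j hj; have := h j hj; simpa using this
  · intro h j hj; simpa using h j hj

theorem pvBfsStep_mem_inner (n : Nat) (st : List Int) :
    ∀ (L : List (List Int)) (acc : List (List Int)) (y : List Int),
    y ∈ (L.foldl (fun acc s =>
      if pvSafeB st s then PySem.Set.add acc (pvPressB n st s) else acc) acc) ↔
    y ∈ acc ∨ ∃ s ∈ L, pvSafeB st s = true ∧ y = pvPressB n st s := by
  intro L
  induction L with
  | nil => intro acc y; simp
  | cons s L ih =>
    intro acc y
    simp only [List.foldl_cons]
    by_cases hsafe : pvSafeB st s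
    · rw [if_pos hsafe, ih]
      rw [PySem.Set.mem_add]
      constructor
      · rintro (⟨h | h⟩ | ⟨s', hs', h1, h2⟩)
        · exact Or.inl h
        · exact Or.inr ⟨s, by simp, hsafe, h⟩
        · exact Or.inr ⟨s', by simp [hs'], h1, h2⟩
      · rintro (h | ⟨s', hs', h1, h2⟩)
        · exact Or.inl (Or.inl h)
        · rcases List.mem_cons.mp hs' with rfl | hs''
          · exact Or.inl (Or.inr h2)
          · exact Or.inr ⟨s', hs'', h1, h2⟩
    · rw [if_neg hsafe, ih]
      constructor
      · rintro (h | ⟨s', hs', h1, h2⟩)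
        · exact Or.inl h
        · exact Or.inr ⟨s', by simp [hs'], h1, h2⟩
      · rintro (h | ⟨s', hs', h1, h2⟩)
        · exact Or.inl h
        · rcases List.mem_cons.mp hs' with rfl | hs''
          · exact absurd h1 (by simpa using hsafe)
          · exact Or.inr ⟨s', hs'', h1, h2⟩

theorem pvBfsStep_mem (n : Nat) (B' frontier : List (List Int)) (y : List Int) :
    y ∈ pvBfsStep n B' frontier ↔
    ∃ st ∈ frontier, ∃ s ∈ B', pvSafeB st s = true ∧ y = pvPressB n st s := by
  unfold pvBfsStep
  have main : ∀ (F : List (List Int)) (acc : List (List Int)),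
      y ∈ (F.foldl (fun acc st =>
        B'.foldl (fun acc s =>
          if pvSafeB st s then PySem.Set.add acc (pvPressB n st s) else acc) acc) acc) ↔
      y ∈ acc ∨ ∃ st ∈ F, ∃ s ∈ B', pvSafeB st s = true ∧ y = pvPressB n st s := by
    intro F
    induction F with
    | nil => intro acc; simp
    | cons st F ih =>
      intro acc
      simp only [List.foldl_cons]
      rw [ih, pvBfsStep_mem_inner]
      constructor
      · rintro (⟨h | ⟨s, hs, h1, h2⟩⟩ | ⟨st', hst', s, hs, h1, h2⟩)
        · exact Or.inl h
        · exact Or.inr ⟨st, by simp, s, hs, h1, h2⟩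
        · exact Or.inr ⟨st', by simp [hst'], s, hs, h1, h2⟩
      · rintro (h | ⟨st', hst', s, hs, h1, h2⟩)
        · exact Or.inl (Or.inl h)
        · rcases List.mem_cons.mp hst' with rfl | hst''
          · exact Or.inl (Or.inr ⟨s, hs, h1, h2⟩)
          · exact Or.inr ⟨st', hst'', s, hs, h1, h2⟩
  rw [main]
  simp [PySem.Set.empty]

theorem pvPath_zero {B : List (List Int)} {u v : List Int} (h : pvPath B u 0 v) : v = u := by
  cases h
  rfl

theorem pvPath_split (B : List (List Int)) (u : List Int) :
    ∀ (k l : Nat) (w : List Int), pvPath B u (k + l) w →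
    ∃ v, pvPath B u k v ∧ pvPath B v l w := by
  intro k
  induction k generalizing u with
  | zero => intro l w h; exact ⟨u, pvPath.refl, by simpa using h⟩
  | succ k ih =>
    intro l w h
    have h' : pvPath B u ((k + l) + 1) w := by
      have : k + 1 + l = (k + l) + 1 := by omega
      rwa [this] at h
    obtain ⟨s, hs, hne, hsafe, hp⟩ := pvPath_cons h'
    obtain ⟨v, hv1, hv2⟩ := ih (pvPress u s) l w hp
    refine ⟨v, ?_, hv2⟩
    have hstep : pvPath B u 1 (pvPress u s) := pvPath.step pvPath.refl hs hne hsafe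
    have := pvPath_trans hstep hv1
    simpa [Nat.add_comm] using this

theorem pvBfs_loop (C : PvCtx) (hC : PvCtxOk C) (hOpt : PvOptOk C)
    (B' : List (List Int)) (hB' : ∀ s, s ∈ B' ↔ s ∈ C.B ∧ s ≠ []) :
    ∀ (fuel i : Nat) (frontier : List (List Int)),
    (∀ u, u ∈ frontier ↔ pvPath C.B C.targets i u) →
    (∀ k', k' < i → ¬ pvGoal C.B C.targets k') →
    i ≤ C.m →
    C.m + 1 ≤ fuel + i →
    pvBfsLoop C.n B' fuel frontier (i : Int) = (C.m : Int) := by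
  intro fuel
  induction fuel with
  | zero => intro i frontier _ _ him hfm; omega
  | succ fuel ih =>
    intro i frontier hfr hnog him hfm
    obtain ⟨w, hw, hwsum⟩ := hOpt.2.1
    have hsplit : ∃ v, pvPath C.B C.targets i v ∧ pvPath C.B v (C.m - i) w := by
      have : i + (C.m - i) = C.m := by omega
      exact pvPath_split C.B C.targets i (C.m - i) w (by rwa [this])
    obtain ⟨vi, hvi, hvi2⟩ := hsplit
    have hvif : vi ∈ frontier := (hfr vi).mpr hvi
    have hfne : frontier.isEmpty = false := by
      cases frontier with
      | nil => simp at hvif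
      | cons a l => rfl
    rw [pvBfsLoop, hfne]
    simp only [Bool.false_eq_true, if_false]
    by_cases hgoal : frontier.any (fun st => st.sum == 0)
    · rw [if_pos hgoal]
      obtain ⟨u, hu, hu0⟩ := List.any_eq_true.mp hgoal
      have hGP : pvGoal C.B C.targets i := ⟨u, (hfr u).mp hu, by simpa using hu0⟩
      have := hOpt.2.2 i hGP
      have : C.m = i := by omega
      rw [this]
    · rw [if_neg hgoal]
      have hnGP : ¬ pvGoal C.B C.targets i := by
        intro ⟨u, hu, hu0⟩
        apply hgoal
        rw [List.any_eq_true]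
        exact ⟨u, (hfr u).mpr hu, by simpa using hu0⟩
      have him' : i + 1 ≤ C.m := by
        rcases Nat.lt_or_ge i C.m with h | h
        · omega
        · have : i = C.m := by omega
          subst this
          exact absurd ⟨w, hw, hwsum⟩ hnGP
      have hfr' : ∀ u, u ∈ pvBfsStep C.n B' frontier ↔ pvPath C.B C.targets (i + 1) u := by
        intro u
        rw [pvBfsStep_mem]
        constructor
        · rintro ⟨st, hst, s, hs, hsafe, rfl⟩
          have hpst : pvPath C.B C.targets i st := (hfr st).mp hst
          have hstOk : pvStOk C st := pvPath_stOk C hC hpst (pvStOk_targets C hC)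
          obtain ⟨hsB, hsne⟩ := (hB' s).mp hs
          obtain ⟨hsnd, hsin0⟩ := hC.2.2.1 s hsB
          have hsin : ∀ j ∈ s, 0 ≤ j ∧ j < (st.length : Int) := by
            intro j hj
            have := hsin0 j hj
            have h2 : (st.length : Int) = (C.n : Int) := by exact_mod_cast hstOk.1
            omega
          have heq : pvPressB C.n st s = pvPress st s := by
            rw [pvPress_eq_pressB st s hsnd hsin, hstOk.1]
          rw [heq]
          exact pvPath.step hpst hsB hsne ((pvSafeB_iff st s).mp hsafe)
        · intro hp
          cases hp with
          | step hp' hsB hsne hsafe =>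
            rename_i st s
            have hstOk : pvStOk C st := pvPath_stOk C hC hp' (pvStOk_targets C hC)
            obtain ⟨hsnd, hsin0⟩ := hC.2.2.1 s hsB
            have hsin : ∀ j ∈ s, 0 ≤ j ∧ j < (st.length : Int) := by
              intro j hj
              have := hsin0 j hj
              have h2 : (st.length : Int) = (C.n : Int) := by exact_mod_cast hstOk.1
              omega
            refine ⟨st, (hfr st).mpr hp', s, (hB' s).mpr ⟨hsB, hsne⟩,
              (pvSafeB_iff st s).mpr hsafe, ?_⟩
            rw [pvPress_eq_pressB st s hsnd hsin, hstOk.1]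
      have hnog' : ∀ k', k' < i + 1 → ¬ pvGoal C.B C.targets k' := by
        intro k' hk'
        rcases Nat.lt_or_ge k' i with h | h
        · exact hnog k' h
        · have : k' = i := by omega
          subst this
          exact hnGP
      have hres := ih (i + 1) (pvBfsStep C.n B' frontier) hfr' hnog' him' (by omega)
      rw [← hres]
      congr 1

-- ---------- putting everything together ----------
theorem pvSum_map_filter {α : Type} (l : List α) (q : α → Bool) (f : α → Int)
    (h : ∀ x ∈ l, q x = false → f x = 0) :
    ((l.filter q).map f).sum = (l.map f).sum := by
  induction l with
  | nil => rfl
  | cons a l ih =>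
    by_cases hq : q a
    · simp [hq, ih (fun x hx => h x (by simp [hx]))]
    · have h0 : f a = 0 := h a (by simp) (by simpa using hq)
      simp [hq, ih (fun x hx => h x (by simp [hx])), h0]

theorem pvSolvable_goal (targets : List Int) (button_sets : List (List Int))
    (C : PvCtx) (hC : PvCtxOk C)
    (hT : C.targets = targets) (hn : C.n = targets.length)
    (hB : C.B = PySem.Set.ofList (button_sets.map pvSortB))
    (hSolv : pvSolvable targets button_sets) :
    ∃ N, pvGoal C.B C.targets N := by
  obtain ⟨c, hc⟩ := hSolv
  classical
  set cs := ((List.finRange button_sets.length).map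
      (fun kk => (pvSortB (button_sets.get kk), ((c kk : Nat) : Nat)))).filter
      (fun p => !p.1.isEmpty) with hcs
  refine ⟨(cs.map (fun p => p.2)).sum, ?_⟩
  have hres := pvCover_path C hC ((cs.map (fun p => p.2)).sum) C.targets cs
    (pvStOk_targets C hC) ?_ ?_ rfl
  · obtain ⟨v, hp, hv⟩ := hres
    exact ⟨v, hp, hv⟩
  · intro p hp
    rw [hcs] at hp
    rw [List.mem_filter] at hp
    obtain ⟨hp1, hp2⟩ := hp
    have hne : p.1 ≠ [] := by
      intro hnil
      have hie : p.1.isEmpty = true := by rw [hnil]; rfl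
      rw [hie] at hp2
      simp at hp2
    obtain ⟨kk, _, rfl⟩ := List.mem_map.mp hp1
    refine ⟨?_, hne⟩
    rw [hB]
    rw [PySem.Set.mem_ofList]
    exact List.mem_map_of_mem (List.get_mem _ _)
  · intro k hk
    have hk' : k < targets.length := by omega
    have hgk : pvGetI C.targets (k : Int) = targets.get ⟨k, hk'⟩ := by
      rw [hT]
      rw [pvGetI_natCast targets k hk']
      simp
    rw [hgk, ← hc ⟨k, hk'⟩]
    rw [Fin.sum_univ_def]
    rw [hcs]
    rw [pvSum_map_filter]
    · rw [List.map_map]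
      congr 1
      apply List.map_congr_left
      intro kk _
      simp only [Function.comp]
      have hms : (k : Int) ∈ pvSortB (button_sets.get kk) ↔ (k : Int) ∈ button_sets.get kk := by
        unfold pvSortB
        exact PySem.List.mem_sorted _ _ _ _
      by_cases hmem : (k : Int) ∈ button_sets.get kk
      · rw [if_pos hmem, if_pos (hms.mpr hmem)]
      · rw [if_neg hmem, if_neg (fun hh => hmem (hms.mp hh))]
    · intro p hp hfalse
      simp only [Bool.not_eq_eq_eq_not] at hfalse
      have : p.1 = [] := by
        cases hpp : p.1 with
        | nil => rfl
        | cons a l => rw [hpp] at hfalse; simp at hfalse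
      rw [this]
      simp

theorem min_presses_component_main (targets : List Int) (button_sets : List (List Int))
    (hPre : Pre_min_presses_component targets button_sets) :
    min_presses_component targets button_sets = min_presses_component_alt targets button_sets := by
  by_cases hz : targets.sum = 0
  · unfold min_presses_component min_presses_component_alt
    rw [if_pos (by simpa using hz)]
    have hfuel : targets.sum.toNat + 2 = 2 := by rw [hz]; rfl
    rw [hfuel]
    rw [pvBfsLoop]
    have hany : ([targets] : List (List Int)).any (fun st => st.sum == 0) = true := by
      simp [hz]
    rw [hany]
    simp
  · -- the search case
    obtain ⟨hNN, hBS, hSolv⟩ : (∀ t ∈ targets, 0 ≤ t) ∧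
        (∀ s ∈ button_sets, s.Nodup ∧ ∀ j ∈ s, 0 ≤ j ∧ j < (targets.length : Int)) ∧
        pvSolvable targets button_sets := hPre.resolve_left hz
    have hBBmem : ∀ s, s ∈ PySem.Set.ofList (button_sets.map pvSortB) ↔
        ∃ s0 ∈ button_sets, s = pvSortB s0 := by
      intro s
      rw [PySem.Set.mem_ofList]
      constructor
      · intro h; obtain ⟨s0, h0, rfl⟩ := List.mem_map.mp h; exact ⟨s0, h0, rfl⟩
      · rintro ⟨s0, h0, rfl⟩; exact List.mem_map_of_mem h0
    have hGood : pvGoodB targets.length (PySem.Set.ofList (button_sets.map pvSortB)) := by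
      intro s hs
      obtain ⟨s0, hs0, rfl⟩ := (hBBmem s).mp hs
      obtain ⟨hnd0, hin0⟩ := hBS s0 hs0
      constructor
      · exact ((PySem.List.sorted_perm s0 (fun x => x) false).nodup_iff).mpr hnd0
      · intro j hj
        exact hin0 j ((PySem.List.mem_sorted _ _ _ _).mp hj)
    have hSb : ∀ s ∈ PySem.Set.ofList (button_sets.map pvSortB), (s.length : Int) ≤
        (PySem.List.max? ((PySem.Set.ofList (button_sets.map pvSortB)).map
          (fun s => (s.length : Int))) (fun x => x)).getD 0 := by
      intro s hs
      cases hmax : PySem.List.max? ((PySem.Set.ofList (button_sets.map pvSortB)).map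
          (fun s => (s.length : Int))) (fun x => x) with
      | none =>
        rw [PySem.List.max?_eq_none_iff] at hmax
        have : (s.length : Int) ∈ (PySem.Set.ofList (button_sets.map pvSortB)).map
            (fun s => (s.length : Int)) := List.mem_map_of_mem hs
        rw [hmax] at this
        simp at this
      | some M =>
        have := PySem.List.max?_isMax hmax (s.length : Int) (List.mem_map_of_mem hs)
        simpa using this
    -- a nonempty button exists
    have hex : ∃ s ∈ PySem.Set.ofList (button_sets.map pvSortB), s ≠ [] := by
      have hexi : ∃ i : Fin targets.length, targets.get i ≠ 0 := by
        by_contra hno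
        push Not at hno
        apply hz
        apply List.sum_eq_zero
        intro x hx
        obtain ⟨k, hk, rfl⟩ := List.getElem_of_mem hx
        exact hno ⟨k, hk⟩
      obtain ⟨i, hi⟩ := hexi
      obtain ⟨c, hc⟩ := hSolv
      have hsum := hc i
      have : ∃ kk, (if ((i : Nat) : Int) ∈ button_sets.get kk then ((c kk : Nat) : Int) else 0)
          ≠ 0 := by
        by_contra hall
        push Not at hall
        apply hi
        rw [← hc i]
        apply Finset.sum_eq_zero
        intro kk _
        exact hall kk
      obtain ⟨kk, hkk⟩ := this
      have hmem : ((i : Nat) : Int) ∈ button_sets.get kk := by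
        by_contra hnm
        rw [if_neg hnm] at hkk
        exact hkk rfl
      refine ⟨pvSortB (button_sets.get kk), ?_, ?_⟩
      · exact (hBBmem _).mpr ⟨_, List.get_mem _ _, rfl⟩
      · intro hnil
        rw [pvSortB] at hnil
        rw [PySem.List.sorted_eq_nil_iff] at hnil
        rw [hnil] at hmem
        simp at hmem
    have hS1 : (1 : Int) ≤ (PySem.List.max? ((PySem.Set.ofList (button_sets.map pvSortB)).map
        (fun s => (s.length : Int))) (fun x => x)).getD 0 := by
      obtain ⟨s, hs, hne⟩ := hex
      have h1 : (1 : Int) ≤ (s.length : Int) := by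
        cases s with
        | nil => exact absurd rfl hne
        | cons a t => simp
      exact le_trans h1 (hSb s hs)
    -- the context (m defined below via Nat.find)
    classical
    have hC0 : PvCtxOk ⟨targets.length, targets,
        PySem.Set.ofList (button_sets.map pvSortB),
        (PySem.List.max? ((PySem.Set.ofList (button_sets.map pvSortB)).map
          (fun s => (s.length : Int))) (fun x => x)).getD 0,
        pvGreedyLoop (PySem.Set.ofList (button_sets.map pvSortB)) (targets.sum.toNat + 2)
          targets 0, 0⟩ := ⟨rfl, hNN, hGood, hSb, hS1⟩
    obtain ⟨N0, hN0⟩ := pvSolvable_goal targets button_sets _ hC0 rfl rfl rfl hSolv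
    have hGPex : ∃ N, pvGoal (PySem.Set.ofList (button_sets.map pvSortB)) targets N := ⟨N0, hN0⟩
    set m := Nat.find hGPex with hm
    set C : PvCtx := ⟨targets.length, targets,
        PySem.Set.ofList (button_sets.map pvSortB),
        (PySem.List.max? ((PySem.Set.ofList (button_sets.map pvSortB)).map
          (fun s => (s.length : Int))) (fun x => x)).getD 0,
        pvGreedyLoop (PySem.Set.ofList (button_sets.map pvSortB)) (targets.sum.toNat + 2)
          targets 0, m⟩ with hCdef
    have hC : PvCtxOk C := ⟨rfl, hNN, hGood, hSb, hS1⟩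
    have hCm : C.m = m := rfl
    have hOpt : PvOptOk C := by
      refine ⟨?_, Nat.find_spec hGPex, fun k hk => Nat.find_min' hGPex hk⟩
      intro u hu
      obtain ⟨kr, hkr, hGPr⟩ := pvGreedy_sound C hC (targets.sum.toNat + 2) targets 0 u
        (pvStOk_targets C hC) ⟨0, by simp, pvPath.refl⟩ hu
      have hle : m ≤ kr := Nat.find_min' hGPex hGPr
      show (m : Int) ≤ u
      omega
    -- the optimum is bounded by the total demand
    have hmS : m ≤ targets.sum.toNat := by
      obtain ⟨w, hw, hwsum⟩ := Nat.find_spec hGPex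
      have h1 : (m : Int) + w.sum ≤ targets.sum :=
        pvPath_sum_le C hC (u := targets) (k := m) (v := w) hw (pvStOk_targets C hC)
      have h2 : (0 : Int) ≤ targets.sum := pvSum_nonneg hNN
      rw [hwsum] at h1
      omega
    -- B side
    have hBside : min_presses_component_alt targets button_sets = (m : Int) := by
      unfold min_presses_component_alt
      dsimp only
      have hB' : ∀ s, s ∈ PySem.Set.diff (PySem.Set.ofList (button_sets.map pvSortB)) [[]] ↔
          s ∈ C.B ∧ s ≠ [] := by
        intro s
        rw [PySem.Set.mem_diff]
        constructor
        · rintro ⟨h1, h2⟩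
          exact ⟨h1, by simpa using h2⟩
        · rintro ⟨h1, h2⟩
          exact ⟨h1, by simpa using h2⟩
      have hchar : ∀ u, u ∈ [targets] ↔ pvPath C.B C.targets 0 u := by
        intro u
        constructor
        · intro hu
          rw [List.mem_singleton] at hu
          subst hu
          exact pvPath.refl
        · intro hp
          rw [pvPath_zero hp]
          exact List.mem_singleton.mpr rfl
      have hnog : ∀ k', k' < 0 → ¬ pvGoal C.B C.targets k' := by
        intro k' hk'
        omega
      have h0m : 0 ≤ C.m := Nat.zero_le _
      have hfuel : C.m + 1 ≤ (targets.sum.toNat + 2) + 0 := by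
        show m + 1 ≤ (targets.sum.toNat + 2) + 0
        omega
      have hres := pvBfs_loop C hC hOpt _ hB' (targets.sum.toNat + 2) 0 [targets]
        hchar hnog h0m hfuel
      exact hres
    -- A side
    have hAside : min_presses_component targets button_sets = (m : Int) := by
      unfold min_presses_component
      rw [if_neg (by simpa using hz)]
      dsimp only
      apply pvAstar_loop C hC hOpt
      · -- the initial invariant
        refine ⟨?_, ?_, ?_, ?_, ?_⟩
        · intro e he
          simp only [List.mem_singleton] at he
          subst he
          refine ⟨0, by simp, pvPath.refl, ?_, 0,
            PySem.Dict.get?_insert_self _ _ _, le_refl _⟩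
          show pvHeur _ targets = 0 + pvHeur C.Smax targets
          rw [zero_add]
        · intro v bv hv
          by_cases hveq : v = targets
          · subst hveq
            rw [PySem.Dict.get?_insert_self] at hv
            cases hv
            exact ⟨0, by simp, pvPath.refl⟩
          · rw [PySem.Dict.get?_insert_of_ne _ _ hveq, PySem.Dict.get?_empty] at hv
            cases hv
        · exact PySem.Dict.nodup_keys_insert _ _ _ PySem.Dict.nodup_keys_empty
        · intro v bv hv
          by_cases hveq : v = targets
          · rw [hveq, PySem.Dict.get?_insert_self] at hv
            cases hv
            left
            rw [hveq]
            have he : ((0 : Int) + pvHeur C.Smax targets, (0 : Int), targets)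
                = (pvHeur C.Smax targets, (0 : Int), targets) := by rw [zero_add]
            rw [he]
            exact List.mem_singleton.mpr rfl
          · rw [PySem.Dict.get?_insert_of_ne _ _ hveq, PySem.Dict.get?_empty] at hv
            cases hv
        · exact ⟨0, PySem.Dict.get?_insert_self _ _ _, le_refl _⟩
      · -- the fuel strictly dominates the potential
        have hsum0 : pvDictSum ((PySem.Dict.empty).insert targets 0) = 0 := rfl
        have hsz0 : ((PySem.Dict.empty : PySem.Dict (List Int) Int).insert targets 0).size = 1 :=
          rfl
        unfold pvMu
        rw [hsum0, hsz0]
        have hNBdef : pvNB C.targets = (targets.map (fun t => t.toNat + 1)).prod := rfl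
        rw [hNBdef]
        set S := targets.sum.toNat with hS
        set NB := (targets.map (fun t => t.toNat + 1)).prod with hNB
        have h1 : (2 * S + 5) * NB ≤ (2 * S + 8) * NB := Nat.mul_le_mul_right _ (by omega)
        have h2 : (2 * S + 8) * (NB + 2) = (2 * S + 8) * NB + (2 * S + 8) * 2 := by ring
        have h3 : NB + 1 - 1 = NB := by omega
        rw [h3]
        simp only [List.length_singleton]
        omega
    rw [hAside, hBside]

-- ===== VERDICT (by name: the statement is the Claim_ definition above) =====
theorem min_presses_component_spec : Claim_equal_min_presses_component := by
  intro targets button_sets _ hPre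
  exact min_presses_component_main targets button_sets hPre
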